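-- pv_equiv track=rewrite | github.com/hitaxim/leetcode-learnings | interview-prep-more/Disconnect Path In a Binary Matrix By At Most One Flip.py | isPossibleToCutPath
-- ===== SOURCE A (Python) =====
-- from typing import List
--
-- def isPossibleToCutPath(grid: List[List[int]]) -> bool:
--     m, n = len(grid), len(grid[0])
--
--     #  number of paths from (0, 0) to (i, j)
--     dp1 = [[0] * (n+1) for _ in range(m + 1)]
--     dp1[1][1] = 1
--     for i in range(1, m + 1):
--         for j in range(1, n + 1):
--             if grid[i-1][j-1]:
--                 dp1[i][j] += dp1[i-1][j] + dp1[i][j-1]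
--
--     #  number of paths from (i, j) to (m-1, n-1)
--     dp2 = [[0] * (n+1) for _ in range(m + 1)]
--     dp2[-2][-2] = 1
--     for i in range(m - 1, -1, -1):
--         for j in range(n - 1, -1, -1):
--             if grid[i][j]:
--                 dp2[i][j] += dp2[i+1][j] + dp2[i][j+1]
--
--     # number of paths from (0, 0) to (m-1, n-1)
--     target = dp1[-1][-1]
--
--     for i in range(m):
--         for j in range(n):
--             if (i!=0 or j!=0) and (i!=m-1 or j!=n-1):
--                 if dp1[i+1][j+1] * dp2[i][j] == target:
--                     return True
--     return False
-- ===== SOURCE B (Python) =====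
-- from typing import List
--
-- def isPossibleToCutPath(grid: List[List[int]]) -> bool:
--     m, n = len(grid), len(grid[0])
--
--     # cells reachable from the start (the start itself always counts)
--     f = []
--     for i in range(m):
--         row = []
--         for j in range(n):
--             if i == 0 and j == 0:
--                 row.append(True)
--             else:
--                 up = f[i - 1][j] if i > 0 else False
--                 left = row[j - 1] if j > 0 else False
--                 row.append(bool(grid[i][j]) and (up or left))
--         f.append(row)
--
--     if not f[m - 1][n - 1]:
--         return True  # already disconnected, no flip needed
--
--     # cells from which the end is reachable (the end itself always counts)
--     g = []
--     for i in range(m - 1, -1, -1):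
--         row = [False] * n
--         for j in range(n - 1, -1, -1):
--             if i == m - 1 and j == n - 1:
--                 row[j] = True
--             else:
--                 down = g[0][j] if i < m - 1 else False
--                 right = row[j + 1] if j < n - 1 else False
--                 row[j] = bool(grid[i][j]) and (down or right)
--         g.insert(0, row)
--
--     # every monotone path crosses each anti-diagonal exactly once, so a lone
--     # path cell on some anti-diagonal lies on every path and flipping it cuts
--     for k in range(1, m + n - 2):
--         cnt = 0
--         for i in range(max(0, k - n + 1), min(m, k + 1)):
--             if f[i][k - i] and g[i][k - i]:
--                 cnt += 1
--         if cnt == 1: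
--             return True
--     return False
-- ===== Notes on version B (the rewrite author's own statement) =====
-- stated objective: faster
-- what changed: Replaces A's arbitrary-precision path counting (two integer DP tables and a product-equals-total scan) by two boolean reachability passes, an early exit when the end is unreachable, and a per-antidiagonal count of path cells (a lone path cell on an antidiagonal lies on every path), so no bignum arithmetic is needed.
-- intended difference: On grids with at least two cells whose bottom-right cell is 0 (violating the problem's guarantee grid[m-1][n-1]==1) and whose every other non-corner cell in the first n columns is nonzero, A returns False because its DP seeds the end cell as having one path regardless of its value, while B returns True, the intended answer since such a grid is already disconnected and no flip is needed. — e.g. on isPossibleToCutPath([[1, 1], [1, 0]]): A returns false, B returns true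
import Mathlib
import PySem

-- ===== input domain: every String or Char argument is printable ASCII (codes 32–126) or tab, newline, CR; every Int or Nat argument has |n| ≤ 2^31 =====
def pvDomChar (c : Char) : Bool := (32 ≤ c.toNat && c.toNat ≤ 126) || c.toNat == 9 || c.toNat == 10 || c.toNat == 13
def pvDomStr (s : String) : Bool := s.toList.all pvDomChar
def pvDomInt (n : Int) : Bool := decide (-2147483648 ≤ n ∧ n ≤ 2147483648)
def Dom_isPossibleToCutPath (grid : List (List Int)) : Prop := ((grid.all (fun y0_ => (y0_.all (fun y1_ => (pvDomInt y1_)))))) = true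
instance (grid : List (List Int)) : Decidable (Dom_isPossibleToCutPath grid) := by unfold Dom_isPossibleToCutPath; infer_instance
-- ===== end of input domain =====

-- B replaces A's big-integer path counting by two boolean reachability passes and a
-- per-antidiagonal count of path cells; objective: faster (no bignum arithmetic).

-- shared 2-D indexing helpers (Python t[i][j] reads/writes)
def pvG2 (t : List (List Int)) (i j : Int) : Int :=
  PySem.List.pyGetD (PySem.List.pyGetD t i []) j 0

def pvG2B (t : List (List Bool)) (i j : Int) : Bool :=
  PySem.List.pyGetD (PySem.List.pyGetD t i []) j false

def pvS2 {α : Type} (t : List (List α)) (i j : Int) (v : α) : List (List α) :=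
  PySem.List.pySetD t i (PySem.List.pySetD (PySem.List.pyGetD t i []) j v)

-- ===== PORT A =====
def isPossibleToCutPath (grid : List (List Int)) : Bool :=
  let m : Int := grid.length
  let n : Int := (PySem.List.pyGetD grid 0 []).length
  let dp1 : List (List Int) :=
    (PySem.List.pyRange 0 (m+1) 1).map (fun _ => (PySem.List.pyRange 0 (n+1) 1).map (fun _ => (0:Int)))
  let dp1 := pvS2 dp1 1 1 1
  let dp1 := (PySem.List.pyRange 1 (m+1) 1).foldl (fun d i =>
      (PySem.List.pyRange 1 (n+1) 1).foldl (fun d j =>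
        if pvG2 grid (i-1) (j-1) ≠ 0 then
          pvS2 d i j (pvG2 d i j + (pvG2 d (i-1) j + pvG2 d i (j-1)))
        else d) d) dp1
  let dp2 : List (List Int) :=
    (PySem.List.pyRange 0 (m+1) 1).map (fun _ => (PySem.List.pyRange 0 (n+1) 1).map (fun _ => (0:Int)))
  let dp2 := pvS2 dp2 (-2) (-2) 1
  let dp2 := (PySem.List.pyRange (m-1) (-1) (-1)).foldl (fun d i =>
      (PySem.List.pyRange (n-1) (-1) (-1)).foldl (fun d j =>
        if pvG2 grid i j ≠ 0 then
          pvS2 d i j (pvG2 d i j + (pvG2 d (i+1) j + pvG2 d i (j+1)))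
        else d) d) dp2
  let target := pvG2 dp1 (-1) (-1)
  (PySem.List.pyRange 0 m 1).any (fun i =>
    (PySem.List.pyRange 0 n 1).any (fun j =>
      ((decide (i ≠ 0) || decide (j ≠ 0)) && (decide (i ≠ m-1) || decide (j ≠ n-1))) &&
      decide (pvG2 dp1 (i+1) (j+1) * pvG2 dp2 i j = target)))

-- ===== PORT B =====
def isPossibleToCutPath_alt (grid : List (List Int)) : Bool :=
  let m : Int := grid.length
  let n : Int := (PySem.List.pyGetD grid 0 []).length
  let f : List (List Bool) :=
    (PySem.List.pyRange 0 m 1).foldl (fun f i =>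
      f ++ [(PySem.List.pyRange 0 n 1).foldl (fun row j =>
        row ++ [if i = 0 ∧ j = 0 then true
          else
            decide (pvG2 grid i j ≠ 0) &&
              ((if 0 < i then pvG2B f (i-1) j else false) ||
               (if 0 < j then PySem.List.pyGetD row (j-1) false else false))]) []]) []
  if !pvG2B f (m-1) (n-1) then true
  else
    let g : List (List Bool) :=
      (PySem.List.pyRange (m-1) (-1) (-1)).foldl (fun g i =>
        ((PySem.List.pyRange (n-1) (-1) (-1)).foldl (fun row j =>
          PySem.List.pySetD row j (
            if i = m-1 ∧ j = n-1 then true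
            else
              decide (pvG2 grid i j ≠ 0) &&
                ((if i < m-1 then pvG2B g 0 j else false) ||
                 (if j < n-1 then PySem.List.pyGetD row (j+1) false else false)))) ((PySem.List.pyRange 0 n 1).map (fun _ => false))) :: g) []
    (PySem.List.pyRange 1 (m+n-2) 1).any (fun k =>
      ((PySem.List.pyRange (max 0 (k-n+1)) (min m (k+1)) 1).foldl
        (fun (c : Int) i => if pvG2B f i (k-i) && pvG2B g i (k-i) then c + 1 else c) 0) == 1)

-- ===== PRECONDITION & SPEC =====
-- Pre_ excludes exactly the inputs on which the Python A raises IndexError: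
-- an empty grid, an empty first row, or a later row shorter than the first row.
def Pre_isPossibleToCutPath (grid : List (List Int)) : Prop :=
  grid ≠ [] ∧ grid.getD 0 [] ≠ [] ∧ ∀ r ∈ grid, (grid.getD 0 []).length ≤ r.length

instance (grid : List (List Int)) : Decidable (Pre_isPossibleToCutPath grid) := by
  unfold Pre_isPossibleToCutPath; infer_instance

def pvWitness_isPossibleToCutPath : List (List Int) := [[1, 1], [0, 1]]

-- On grids with at least two cells whose bottom-right cell is 0 (violating the problem's
-- guarantee grid[m-1][n-1]==1) and whose every other non-corner cell of the first n
-- columns is nonzero, A returns False because its DP seeds the end cell with one path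
-- regardless of its value, while B returns True, the intended answer since such a grid
-- is already disconnected and no flip is needed.
def D_isPossibleToCutPath (grid : List (List Int)) : Prop :=
  3 ≤ grid.length + (grid.getD 0 []).length ∧
  (grid.getD (grid.length - 1) []).getD ((grid.getD 0 []).length - 1) 0 = 0 ∧
  ∀ i, i < grid.length → ∀ j, j < (grid.getD 0 []).length →
    ¬(i = 0 ∧ j = 0) → ¬(i = grid.length - 1 ∧ j = (grid.getD 0 []).length - 1) →
    (grid.getD i []).getD j 0 ≠ 0

instance (grid : List (List Int)) : Decidable (D_isPossibleToCutPath grid) := by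
  unfold D_isPossibleToCutPath; infer_instance

def Spec_isPossibleToCutPath (grid : List (List Int)) (out : Bool) : Prop :=
  ¬ D_isPossibleToCutPath grid → out = isPossibleToCutPath_alt grid

instance (grid : List (List Int)) (out : Bool) : Decidable (Spec_isPossibleToCutPath grid out) := by
  unfold Spec_isPossibleToCutPath; infer_instance

def pvDiffWitness_isPossibleToCutPath : List (List Int) := [[1, 1], [1, 0]]

def pvDiffWitnessOut_isPossibleToCutPath : Bool × Bool := (false, true)

-- ===== CLAIM (what is proved, stated in full; the proofs are below) =====
def Claim_unchanged_isPossibleToCutPath : Prop :=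
  ∀ (grid : List (List Int)), Dom_isPossibleToCutPath grid → Pre_isPossibleToCutPath grid →
    Spec_isPossibleToCutPath grid (isPossibleToCutPath grid)

def Claim_changed_isPossibleToCutPath : Prop :=
  Dom_isPossibleToCutPath (pvDiffWitness_isPossibleToCutPath) ∧
  Pre_isPossibleToCutPath (pvDiffWitness_isPossibleToCutPath) ∧
  D_isPossibleToCutPath (pvDiffWitness_isPossibleToCutPath) ∧
  isPossibleToCutPath (pvDiffWitness_isPossibleToCutPath) = pvDiffWitnessOut_isPossibleToCutPath.1 ∧
  isPossibleToCutPath_alt (pvDiffWitness_isPossibleToCutPath) = pvDiffWitnessOut_isPossibleToCutPath.2 ∧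
  pvDiffWitnessOut_isPossibleToCutPath.1 ≠ pvDiffWitnessOut_isPossibleToCutPath.2

def Claim_exact_isPossibleToCutPath : Prop :=
  ∀ (grid : List (List Int)), Dom_isPossibleToCutPath grid → Pre_isPossibleToCutPath grid →
    D_isPossibleToCutPath grid → isPossibleToCutPath grid ≠ isPossibleToCutPath_alt grid

-- ===== LEMMAS AND PROOFS =====

-- dimensions
def mOf (grid : List (List Int)) : ℕ := grid.length
def nOf (grid : List (List Int)) : ℕ := (grid.getD 0 []).length

-- the cell predicate both programs branch on: in range and nonzero
def gB (grid : List (List Int)) (i j : ℕ) : Bool :=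
  decide (i < mOf grid) && decide (j < nOf grid) && decide ((grid.getD i []).getD j 0 ≠ 0)

-- number of monotone paths from (0,0) to (i,j), with A's seeding (start always open)
def aM (grid : List (List Int)) : ℕ → ℕ → ℕ
  | 0, 0 => 1
  | 0, j+1 => if gB grid 0 (j+1) then aM grid 0 j else 0
  | i+1, 0 => if gB grid (i+1) 0 then aM grid i 0 else 0
  | i+1, j+1 => if gB grid (i+1) (j+1) then aM grid i (j+1) + aM grid (i+1) j else 0

-- forward reachability: aM is positive
def fM (grid : List (List Int)) : ℕ → ℕ → Bool
  | 0, 0 => true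
  | 0, j+1 => gB grid 0 (j+1) && fM grid 0 j
  | i+1, 0 => gB grid (i+1) 0 && fM grid i 0
  | i+1, j+1 => gB grid (i+1) (j+1) && (fM grid i (j+1) || fM grid (i+1) j)

-- number of paths from (m-1-di, n-1-dj) to (m-1,n-1), indexed by distance from the end
def bD (grid : List (List Int)) : ℕ → ℕ → ℕ
  | 0, 0 => 1
  | 0, dj+1 => if gB grid (mOf grid - 1) (nOf grid - 1 - (dj+1)) then bD grid 0 dj else 0
  | di+1, 0 => if gB grid (mOf grid - 1 - (di+1)) (nOf grid - 1) then bD grid di 0 else 0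
  | di+1, dj+1 => if gB grid (mOf grid - 1 - (di+1)) (nOf grid - 1 - (dj+1)) then
      bD grid di (dj+1) + bD grid (di+1) dj else 0

def gD (grid : List (List Int)) : ℕ → ℕ → Bool
  | 0, 0 => true
  | 0, dj+1 => gB grid (mOf grid - 1) (nOf grid - 1 - (dj+1)) && gD grid 0 dj
  | di+1, 0 => gB grid (mOf grid - 1 - (di+1)) (nOf grid - 1) && gD grid di 0
  | di+1, dj+1 => gB grid (mOf grid - 1 - (di+1)) (nOf grid - 1 - (dj+1)) &&
      (gD grid di (dj+1) || gD grid (di+1) dj)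

-- dp2 value at absolute coordinates (0 outside the grid)
def b2 (grid : List (List Int)) (i j : ℕ) : ℕ :=
  if i < mOf grid ∧ j < nOf grid then bD grid (mOf grid - 1 - i) (nOf grid - 1 - j) else 0

def g2 (grid : List (List Int)) (i j : ℕ) : Bool :=
  decide (i < mOf grid) && decide (j < nOf grid) &&
    gD grid (mOf grid - 1 - i) (nOf grid - 1 - j)

def auM (grid : List (List Int)) (i j : ℕ) : ℕ := match i with | 0 => 0 | i'+1 => aM grid i' j
def alM (grid : List (List Int)) (i j : ℕ) : ℕ := match j with | 0 => 0 | j'+1 => aM grid i j'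

def tgt (grid : List (List Int)) : ℕ := aM grid (mOf grid - 1) (nOf grid - 1)

-- sum of (paths from start through c) * (paths from c to end) over an antidiagonal
def diagS (grid : List (List Int)) (k : ℕ) : ℕ :=
  ∑ p ∈ Finset.antidiagonal k, aM grid p.1 p.2 * b2 grid p.1 p.2

def qK (grid : List (List Int)) (K i : ℕ) : Bool :=
  fM grid i (K-i) && g2 grid i (K-i)

def cntF (grid : List (List Int)) (K : ℕ) : ℕ :=
  ((Finset.range (K+1)).filter (fun i => qK grid K i = true)).card

def sizeF (grid : List (List Int)) (K : ℕ) : ℕ :=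
  min (mOf grid) (K+1) - (K+1 - nOf grid)

-- expected dp1 table contents after processing rows ≤ r fully and row r+1 through column c
def F1 (grid : List (List Int)) (r c p q : ℕ) : Int :=
  if p = 0 ∨ q = 0 then 0
  else if p ≤ r ∨ (p = r+1 ∧ q ≤ c) then (aM grid (p-1) (q-1) : Int)
  else if p = 1 ∧ q = 1 then 1 else 0

def Inv1 (grid : List (List Int)) (t : List (List Int)) (r c : ℕ) : Prop :=
  t.length = mOf grid + 1 ∧ (∀ row ∈ t, row.length = nOf grid + 1) ∧
  ∀ p q, p ≤ mOf grid → q ≤ nOf grid → (t.getD p []).getD q 0 = F1 grid r c p q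

-- expected dp2 table contents after processing r rows (from the bottom) fully and
-- row m-1-r through c columns (from the right)
def F2 (grid : List (List Int)) (r c p q : ℕ) : Int :=
  if p = mOf grid ∨ q = nOf grid then 0
  else if mOf grid - r ≤ p ∨ (p = mOf grid - 1 - r ∧ nOf grid - c ≤ q) then (b2 grid p q : Int)
  else if p = mOf grid - 1 ∧ q = nOf grid - 1 then 1 else 0

def Inv2 (grid : List (List Int)) (t : List (List Int)) (r c : ℕ) : Prop :=
  t.length = mOf grid + 1 ∧ (∀ row ∈ t, row.length = nOf grid + 1) ∧
  ∀ p q, p ≤ mOf grid → q ≤ nOf grid → (t.getD p []).getD q 0 = F2 grid r c p q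

-- expected f / g tables of port B
def EF (grid : List (List Int)) (r : ℕ) : List (List Bool) :=
  (List.range r).map (fun i => (List.range (nOf grid)).map (fun j => fM grid i j))

def EG (grid : List (List Int)) (r : ℕ) : List (List Bool) :=
  (List.range r).map (fun t => (List.range (nOf grid)).map (fun j => g2 grid (mOf grid - r + t) j))

-- ---------- small list lemmas ----------

theorem getD_set' {α : Type} (xs : List α) (i j : ℕ) (v : α) (d : α) (hi : i < xs.length) :
    (xs.set i v).getD j d = if j = i then v else xs.getD j d := by
  simp only [List.getD_eq_getElem?_getD, List.getElem?_set]
  by_cases h : i = j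
  · subst h; simp [hi]
  · rw [if_neg h, if_neg (by omega : ¬ j = i)]

theorem getD_map_range' {α : Type} (h : ℕ → α) (c q : ℕ) (d : α) (hq : q < c) :
    ((List.range c).map h).getD q d = h q := by
  simp [List.getD_eq_getElem?_getD, hq]

theorem set_map_range {α : Type} (h : ℕ → α) (n j : ℕ) (v : α) (hj : j < n) :
    ((List.range n).map h).set j v
      = (List.range n).map (fun q => if q = j then v else h q) := by
  apply List.ext_getElem
  · simp
  · intro t h1 h2
    simp only [List.getElem_set, List.getElem_map, List.getElem_range]
    by_cases ht : j = t
    · subst ht; simp [List.length_map, List.length_range] at h1; simp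
    · rw [if_neg ht, if_neg (by omega : ¬ t = j)]

theorem countP_range_card (L : ℕ) (h : ℕ → Bool) :
    (List.range L).countP h = ((Finset.range L).filter (fun i => h i = true)).card := by
  induction L with
  | zero => simp
  | succ L ih =>
    rw [List.range_succ, List.countP_append, Finset.range_add_one, Finset.filter_insert]
    by_cases hL : h L = true
    · rw [if_pos hL, Finset.card_insert_of_notMem (by simp)]
      simp [List.countP_cons, hL, ih]
    · rw [if_neg hL]
      simp [hL, ih]

theorem foldl_count (l : List Int) (q : Int → Bool) (a : Int) :
    l.foldl (fun (c : Int) i => if q i then c + 1 else c) a = a + (l.countP q : Int) := by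
  induction l generalizing a with
  | nil => simp
  | cons x l ih =>
    simp only [List.foldl_cons, List.countP_cons, ih]
    by_cases hx : q x = true
    · rw [if_pos hx, if_pos hx]; push_cast; ring
    · rw [if_neg hx, if_neg hx]; push_cast; ring

theorem pySetD_neg_ofNat' {α : Type} (xs : List α) (k : ℕ) (v : α) (h1 : 0 < k)
    (h2 : k ≤ xs.length) :
    PySem.List.pySetD xs (-(k : Int)) v = xs.set (xs.length - k) v := by
  simp only [PySem.List.pySetD, PySem.List.pySet?, PySem.List.pyIdx?]
  rw [if_neg (by omega), if_pos (by omega)]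
  simp

-- ---------- math-level lemmas ----------

theorem aM_eq (grid : List (List Int)) (i j : ℕ) (h : ¬(i = 0 ∧ j = 0)) :
    aM grid i j = if gB grid i j then auM grid i j + alM grid i j else 0 := by
  rcases i with _ | i <;> rcases j with _ | j
  · exact absurd ⟨rfl, rfl⟩ h
  · simp [aM, auM, alM]
  · simp [aM, auM, alM]
  · simp [aM, auM, alM]

theorem aM_pos_iff (grid : List (List Int)) (i j : ℕ) :
    0 < aM grid i j ↔ fM grid i j = true := by
  fun_induction aM grid i j <;> simp_all [fM]

theorem fM_expand (grid : List (List Int)) (i j : ℕ) (h : ¬(i = 0 ∧ j = 0)) :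
    fM grid i j = (gB grid i j &&
      ((decide (0 < i) && fM grid (i-1) j) || (decide (0 < j) && fM grid i (j-1)))) := by
  rcases i with _ | i <;> rcases j with _ | j
  · exact absurd ⟨rfl, rfl⟩ h
  · simp [fM]
  · simp [fM]
  · simp [fM, Bool.or_comm]

theorem bD_pos_iff (grid : List (List Int)) (di dj : ℕ) :
    0 < bD grid di dj ↔ gD grid di dj = true := by
  fun_induction bD grid di dj <;> simp_all [gD]

theorem b2_pos_iff (grid : List (List Int)) (i j : ℕ) :
    0 < b2 grid i j ↔ g2 grid i j = true := by
  unfold b2 g2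
  split_ifs with h
  · simp [bD_pos_iff, h.1, h.2]
  · simp only [Bool.and_eq_true, decide_eq_true_eq]
    constructor
    · omega
    · rintro ⟨⟨h1, h2⟩, _⟩; exact absurd ⟨h1, h2⟩ h

theorem fM_oob (grid : List (List Int)) (hm : 1 ≤ mOf grid) (hn : 1 ≤ nOf grid)
    (i j : ℕ) (h : mOf grid ≤ i ∨ nOf grid ≤ j) : fM grid i j = false := by
  have hg : gB grid i j = false := by
    simp only [gB, Bool.and_eq_false_iff, decide_eq_false_iff_not, mOf, nOf] at *
    omega
  rcases i with _ | i <;> rcases j with _ | j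
  · exfalso; unfold mOf nOf at *; omega
  · simp [fM, hg]
  · simp [fM, hg]
  · simp [fM, hg]

theorem b2_end (grid : List (List Int)) (hm : 1 ≤ mOf grid) (hn : 1 ≤ nOf grid) :
    b2 grid (mOf grid - 1) (nOf grid - 1) = 1 := by
  unfold b2
  rw [if_pos ⟨by omega, by omega⟩, Nat.sub_self, Nat.sub_self]
  simp [bD]

theorem g2_end (grid : List (List Int)) (hm : 1 ≤ mOf grid) (hn : 1 ≤ nOf grid) :
    g2 grid (mOf grid - 1) (nOf grid - 1) = true := by
  unfold g2
  rw [Nat.sub_self, Nat.sub_self]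
  simp [gD]
  omega

theorem b2_expand (grid : List (List Int)) (i j : ℕ) (hi : i < mOf grid) (hj : j < nOf grid)
    (hne : ¬(i = mOf grid - 1 ∧ j = nOf grid - 1)) :
    b2 grid i j = if gB grid i j then b2 grid (i+1) j + b2 grid i (j+1) else 0 := by
  have bin : ∀ p q, p < mOf grid → q < nOf grid →
      b2 grid p q = bD grid (mOf grid - 1 - p) (nOf grid - 1 - q) := by
    intro p q h1 h2; unfold b2; rw [if_pos ⟨h1, h2⟩]
  have bout : ∀ p q, ¬(p < mOf grid ∧ q < nOf grid) → b2 grid p q = 0 := by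
    intro p q h1; unfold b2; rw [if_neg h1]
  rcases Nat.lt_or_ge i (mOf grid - 1) with hi2 | hi2 <;>
    rcases Nat.lt_or_ge j (nOf grid - 1) with hj2 | hj2
  · rw [bin i j hi hj, bin (i+1) j (by omega) hj, bin i (j+1) hi (by omega),
      show mOf grid - 1 - i = (mOf grid - 2 - i) + 1 from by omega,
      show nOf grid - 1 - j = (nOf grid - 2 - j) + 1 from by omega,
      show mOf grid - 1 - (i+1) = mOf grid - 2 - i from by omega,
      show nOf grid - 1 - (j+1) = nOf grid - 2 - j from by omega]
    simp only [bD]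
    rw [show mOf grid - 1 - (mOf grid - 2 - i + 1) = i from by omega,
      show nOf grid - 1 - (nOf grid - 2 - j + 1) = j from by omega]
  · rw [bin i j hi hj, bin (i+1) j (by omega) hj, bout i (j+1) (by omega),
      show nOf grid - 1 - j = 0 from by omega,
      show mOf grid - 1 - i = (mOf grid - 2 - i) + 1 from by omega,
      show mOf grid - 1 - (i+1) = mOf grid - 2 - i from by omega]
    simp only [bD]
    rw [show mOf grid - 1 - (mOf grid - 2 - i + 1) = i from by omega,
      show nOf grid - 1 = j from by omega]
    simp only [Nat.add_zero]
  · rw [bin i j hi hj, bout (i+1) j (by omega), bin i (j+1) hi (by omega),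
      show mOf grid - 1 - i = 0 from by omega,
      show nOf grid - 1 - j = (nOf grid - 2 - j) + 1 from by omega,
      show nOf grid - 1 - (j+1) = nOf grid - 2 - j from by omega]
    simp only [bD]
    rw [show nOf grid - 1 - (nOf grid - 2 - j + 1) = j from by omega,
      show mOf grid - 1 = i from by omega]
    simp only [Nat.zero_add]
  · exact absurd ⟨by omega, by omega⟩ hne

theorem g2_expand (grid : List (List Int)) (i j : ℕ) (hi : i < mOf grid) (hj : j < nOf grid)
    (hne : ¬(i = mOf grid - 1 ∧ j = nOf grid - 1)) :
    g2 grid i j = (gB grid i j && (g2 grid (i+1) j || g2 grid i (j+1))) := by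
  have h1 := b2_pos_iff grid i j
  have h2 := b2_pos_iff grid (i+1) j
  have h3 := b2_pos_iff grid i (j+1)
  have h4 := b2_expand grid i j hi hj hne
  cases hg : gB grid i j with
  | false =>
    rw [hg, if_neg (by simp)] at h4
    rw [h4] at h1
    simp only [Bool.false_and]
    cases hx : g2 grid i j with
    | false => rfl
    | true => simp [hx] at h1
  | true =>
    rw [hg, if_pos rfl] at h4
    simp only [Bool.true_and]
    cases hx : g2 grid i j with
    | true =>
      simp [hx] at h1
      rcases Nat.lt_or_ge 0 (b2 grid (i+1) j) with hp | hp
      · rw [h2.mp hp]; rw [Bool.true_or]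
      · have hq : 0 < b2 grid i (j+1) := by omega
        rw [h3.mp hq, Bool.or_true]
    | false =>
      simp [hx] at h1
      have hz : b2 grid i j = 0 := by omega
      rw [hz] at h4
      have z2 : b2 grid (i+1) j = 0 := by omega
      have z3 : b2 grid i (j+1) = 0 := by omega
      have : g2 grid (i+1) j = false := by
        cases hy : g2 grid (i+1) j
        · rfl
        · simp [hy] at h2; omega
      have h3' : g2 grid i (j+1) = false := by
        cases hy : g2 grid i (j+1)
        · rfl
        · simp [hy] at h3; omega
      rw [this, h3']
      rfl

theorem diagS_step (grid : List (List Int)) (hm : 1 ≤ mOf grid) (hn : 1 ≤ nOf grid)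
    (k : ℕ) (hk : 1 ≤ k) (hk2 : k + 1 ≤ mOf grid + nOf grid - 2)
    (hend : k + 1 = mOf grid + nOf grid - 2 → gB grid (mOf grid - 1) (nOf grid - 1) = true) :
    diagS grid (k+1) = diagS grid k := by
  unfold diagS
  have hcell : ∀ p : ℕ × ℕ, p ∈ Finset.antidiagonal (k+1) →
      aM grid p.1 p.2 * b2 grid p.1 p.2
        = auM grid p.1 p.2 * b2 grid p.1 p.2 + alM grid p.1 p.2 * b2 grid p.1 p.2 := by
    rintro ⟨p1, p2⟩ hp
    rw [Finset.mem_antidiagonal] at hp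
    simp only at hp ⊢
    have hp0 : ¬(p1 = 0 ∧ p2 = 0) := by omega
    by_cases hgb : gB grid p1 p2 = true
    · rw [aM_eq grid p1 p2 hp0, if_pos hgb, Nat.add_mul]
    · have hb : b2 grid p1 p2 = 0 := by
        by_cases hend' : p1 = mOf grid - 1 ∧ p2 = nOf grid - 1
        · obtain ⟨e1, e2⟩ := hend'
          subst e1; subst e2
          exact absurd (hend (by omega)) hgb
        · rcases Nat.lt_or_ge p1 (mOf grid) with h1 | h1
          · rcases Nat.lt_or_ge p2 (nOf grid) with h2 | h2
            · rw [b2_expand grid p1 p2 h1 h2 hend', if_neg hgb]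
            · unfold b2; rw [if_neg (by omega)]
          · unfold b2; rw [if_neg (by omega)]
      rw [hb]
      simp
  rw [Finset.sum_congr rfl hcell, Finset.sum_add_distrib,
    Finset.Nat.sum_antidiagonal_succ
      (f := fun p : ℕ × ℕ => auM grid p.1 p.2 * b2 grid p.1 p.2),
    Finset.Nat.sum_antidiagonal_succ'
      (f := fun p : ℕ × ℕ => alM grid p.1 p.2 * b2 grid p.1 p.2)]
  simp only [auM, alM, Nat.zero_mul, Nat.zero_add]
  rw [← Finset.sum_add_distrib]
  apply Finset.sum_congr rfl
  rintro ⟨p1, p2⟩ hp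
  rw [Finset.mem_antidiagonal] at hp
  simp only at hp ⊢
  rw [← Nat.mul_add]
  by_cases hgb : gB grid p1 p2 = true
  · have hb1 : p1 < mOf grid := by
      have := hgb; simp only [gB, Bool.and_eq_true, decide_eq_true_eq] at this; exact this.1.1
    have hb2 : p2 < nOf grid := by
      have := hgb; simp only [gB, Bool.and_eq_true, decide_eq_true_eq] at this; exact this.1.2
    have hne : ¬(p1 = mOf grid - 1 ∧ p2 = nOf grid - 1) := by omega
    rw [b2_expand grid p1 p2 hb1 hb2 hne, if_pos hgb]
  · have hp0 : ¬(p1 = 0 ∧ p2 = 0) := by omega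
    rw [aM_eq grid p1 p2 hp0, if_neg hgb, Nat.zero_mul, Nat.zero_mul]

theorem diagS_last (grid : List (List Int)) (hm : 1 ≤ mOf grid) (hn : 1 ≤ nOf grid) :
    diagS grid (mOf grid + nOf grid - 2) = tgt grid := by
  unfold diagS tgt
  rw [Finset.sum_eq_single (mOf grid - 1, nOf grid - 1)]
  · rw [b2_end grid hm hn, Nat.mul_one]
  · rintro ⟨p1, p2⟩ hp hne
    rw [Finset.mem_antidiagonal] at hp
    have hne' : ¬(p1 = mOf grid - 1 ∧ p2 = nOf grid - 1) := by
      rintro ⟨e1, e2⟩; exact hne (by rw [e1, e2])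
    simp only at hp hne' ⊢
    have hp0 : ¬(p1 = 0 ∧ p2 = 0) := by omega
    rw [aM_eq grid p1 p2 hp0, if_neg ?_, Nat.zero_mul]
    simp only [gB, Bool.and_eq_true, decide_eq_true_eq, not_and]
    rintro ⟨c1, c2⟩
    omega
  · intro hmem
    exact absurd (Finset.mem_antidiagonal.mpr (by simp; omega)) hmem

theorem diagS_eq_tgt (grid : List (List Int)) (hm : 1 ≤ mOf grid) (hn : 1 ≤ nOf grid)
    (hG : gB grid (mOf grid - 1) (nOf grid - 1) = true)
    (k : ℕ) (hk : 1 ≤ k) (hk2 : k ≤ mOf grid + nOf grid - 2) :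
    diagS grid k = tgt grid := by
  have key : ∀ d k', 1 ≤ k' → k' + d = mOf grid + nOf grid - 2 → diagS grid k' = tgt grid := by
    intro d
    induction d with
    | zero =>
      intro k' hk' hkd
      have : k' = mOf grid + nOf grid - 2 := by omega
      rw [this]; exact diagS_last grid hm hn
    | succ d ih =>
      intro k' hk' hkd
      have hstep := diagS_step grid hm hn k' hk' (by omega) (fun _ => hG)
      rw [← hstep]
      exact ih (k'+1) (by omega) (by omega)
  exact key (mOf grid + nOf grid - 2 - k) k hk (by omega)

theorem rangeS_eq_tgt (grid : List (List Int)) (hm : 1 ≤ mOf grid) (hn : 1 ≤ nOf grid)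
    (hG : gB grid (mOf grid - 1) (nOf grid - 1) = true)
    (K : ℕ) (hk : 1 ≤ K) (hk2 : K ≤ mOf grid + nOf grid - 2) :
    ∑ i ∈ Finset.range (K+1), aM grid i (K-i) * b2 grid i (K-i) = tgt grid := by
  have := Finset.Nat.sum_antidiagonal_eq_sum_range_succ_mk
    (f := fun p : ℕ × ℕ => aM grid p.1 p.2 * b2 grid p.1 p.2) (n := K)
  rw [← this]
  exact diagS_eq_tgt grid hm hn hG K hk hk2

theorem qK_pos (grid : List (List Int)) (K i : ℕ) :
    qK grid K i = true ↔ 0 < aM grid i (K-i) * b2 grid i (K-i) := by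
  simp only [qK, Bool.and_eq_true, ← aM_pos_iff, ← b2_pos_iff]
  constructor
  · rintro ⟨h1, h2⟩; exact Nat.mul_pos h1 h2
  · intro h
    constructor
    · rcases Nat.eq_zero_or_pos (aM grid i (K-i)) with h0 | h0
      · rw [h0, Nat.zero_mul] at h; omega
      · exact h0
    · rcases Nat.eq_zero_or_pos (b2 grid i (K-i)) with h0 | h0
      · rw [h0, Nat.mul_zero] at h; omega
      · exact h0

-- per-diagonal equivalence when a path exists
theorem diag_t_case (grid : List (List Int)) (hm : 1 ≤ mOf grid) (hn : 1 ≤ nOf grid)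
    (hT : 0 < tgt grid) (K : ℕ) (hk : 1 ≤ K) (hk2 : K ≤ mOf grid + nOf grid - 3) :
    ((∃ i j, i < mOf grid ∧ j < nOf grid ∧ i + j = K ∧
        aM grid i j * b2 grid i j = tgt grid) ↔ cntF grid K = 1) := by
  have hG : gB grid (mOf grid - 1) (nOf grid - 1) = true := by
    by_contra hgb
    have h0 : ¬(mOf grid - 1 = 0 ∧ nOf grid - 1 = 0) := by omega
    have := aM_eq grid (mOf grid - 1) (nOf grid - 1) h0
    rw [if_neg hgb] at this
    unfold tgt at hT
    omega
  have hsum := rangeS_eq_tgt grid hm hn hG K hk (by omega)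
  unfold cntF
  constructor
  · rintro ⟨i, j, hi, hj, hij, hprod⟩
    have hjj : j = K - i := by omega
    subst hjj
    have hqi : qK grid K i = true := (qK_pos grid K i).mpr (by rw [hprod]; exact hT)
    have hfil : (Finset.range (K+1)).filter (fun x => qK grid K x = true) = {i} := by
      apply Finset.eq_singleton_iff_unique_mem.mpr
      refine ⟨Finset.mem_filter.mpr ⟨Finset.mem_range.mpr (by omega), hqi⟩, ?_⟩
      intro x hx
      by_contra hxi
      have hxm : x ∈ Finset.range (K+1) := (Finset.mem_filter.mp hx).1
      have hqx : 0 < aM grid x (K-x) * b2 grid x (K-x) :=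
        (qK_pos grid K x).mp (Finset.mem_filter.mp hx).2
      have hia : i ∈ Finset.range (K+1) := Finset.mem_range.mpr (by omega)
      have h5 := Finset.sum_erase_add (Finset.range (K+1))
        (fun x => aM grid x (K-x) * b2 grid x (K-x)) hia
      have h6 : aM grid x (K-x) * b2 grid x (K-x)
          ≤ ∑ y ∈ (Finset.range (K+1)).erase i, aM grid y (K-y) * b2 grid y (K-y) :=
        Finset.single_le_sum (f := fun y => aM grid y (K-y) * b2 grid y (K-y))
          (fun _ _ => Nat.zero_le _) (Finset.mem_erase.mpr ⟨hxi, hxm⟩)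
      rw [hsum] at h5
      beta_reduce at h5
      omega
    rw [hfil]
    rfl
  · intro hcard
    obtain ⟨i, hfil⟩ := Finset.card_eq_one.mp hcard
    have hmem : i ∈ (Finset.range (K+1)).filter (fun x => qK grid K x = true) := by
      rw [hfil]; exact Finset.mem_singleton_self i
    obtain ⟨hir, hqi⟩ := Finset.mem_filter.mp hmem
    have hqi' := (qK_pos grid K i).mp hqi
    have hbounds : i < mOf grid ∧ K - i < nOf grid := by
      have hf : fM grid i (K-i) = true := by
        have h := hqi
        simp only [qK, Bool.and_eq_true] at h
        exact h.1
      by_contra hc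
      rw [fM_oob grid hm hn i (K-i) (by omega)] at hf
      cases hf
    have hFi : aM grid i (K-i) * b2 grid i (K-i) = tgt grid := by
      have hsub : ∑ y ∈ (Finset.range (K+1)).filter (fun x => qK grid K x = true),
            aM grid y (K-y) * b2 grid y (K-y)
          = ∑ y ∈ Finset.range (K+1), aM grid y (K-y) * b2 grid y (K-y) := by
        apply Finset.sum_subset (Finset.filter_subset _ _)
        intro x hx hnx
        have : ¬ qK grid K x = true := by
          intro hq; exact hnx (Finset.mem_filter.mpr ⟨hx, hq⟩)
        have := (qK_pos grid K x).not.mp this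
        omega
      rw [hfil, Finset.sum_singleton] at hsub
      rw [hsub, hsum]
    have hiK : i < K + 1 := Finset.mem_range.mp hir
    exact ⟨i, K - i, hbounds.1, hbounds.2, by omega, hFi⟩

-- window form of the count
theorem cntF_window (grid : List (List Int)) (hm : 1 ≤ mOf grid) (hn : 1 ≤ nOf grid)
    (K : ℕ) :
    cntF grid K
      = ((Finset.Ico (K+1 - nOf grid) (min (mOf grid) (K+1))).filter
          (fun i => qK grid K i = true)).card := by
  unfold cntF
  congr 1
  apply Finset.ext
  intro i
  simp only [Finset.mem_filter, Finset.mem_range, Finset.mem_Ico]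
  constructor
  · rintro ⟨hr, hq⟩
    have hf : fM grid i (K-i) = true := by
      have h := hq
      simp only [qK, Bool.and_eq_true] at h
      exact h.1
    have hbounds : i < mOf grid ∧ K - i < nOf grid := by
      by_contra hc
      rw [fM_oob grid hm hn i (K-i) (by omega)] at hf
      cases hf
    exact ⟨⟨by omega, by omega⟩, hq⟩
  · rintro ⟨⟨h1, h2⟩, hq⟩
    exact ⟨by omega, hq⟩

-- when no path exists but the end cell is open, some intermediate cell is unreachable
theorem exists_unreachable (grid : List (List Int)) (hm : 1 ≤ mOf grid) (hn : 1 ≤ nOf grid)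
    (hdis : fM grid (mOf grid - 1) (nOf grid - 1) = false)
    (hend : gB grid (mOf grid - 1) (nOf grid - 1) = true) :
    ∃ i j, i < mOf grid ∧ j < nOf grid ∧ ¬(i = 0 ∧ j = 0) ∧
      ¬(i = mOf grid - 1 ∧ j = nOf grid - 1) ∧ fM grid i j = false := by
  have hstart : fM grid 0 0 = true := by simp [fM]
  have hne : ¬(mOf grid - 1 = 0 ∧ nOf grid - 1 = 0) := by
    rintro ⟨e1, e2⟩
    rw [e1, e2, hstart] at hdis
    cases hdis
  have hexp := fM_expand grid (mOf grid - 1) (nOf grid - 1) hne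
  rw [hdis, hend, Bool.true_and] at hexp
  have hexp' := hexp.symm
  rw [Bool.or_eq_false_iff] at hexp'
  obtain ⟨hup, hleft⟩ := hexp'
  rcases Nat.lt_or_ge 1 (mOf grid) with hm2 | hm2
  · -- 2 ≤ m: the cell above the end is unreachable (or use it directly)
    rw [Bool.and_eq_false_iff] at hup
    rcases hup with hd | hfu
    · rw [decide_eq_false_iff_not] at hd; omega
    · by_cases hn2 : 1 < nOf grid
      · exact ⟨mOf grid - 1 - 1, nOf grid - 1, by omega, by omega, by omega, by omega, hfu⟩
      · -- n = 1: the column case; if m = 2 the cell above is the start, contradiction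
        have hn1 : nOf grid = 1 := by omega
        by_cases hm3 : 2 < mOf grid
        · exact ⟨mOf grid - 1 - 1, nOf grid - 1, by omega, by omega, by omega, by omega, hfu⟩
        · exfalso
          have : mOf grid - 1 - 1 = 0 := by omega
          rw [this, show nOf grid - 1 = 0 from by omega, hstart] at hfu
          cases hfu
  · -- m = 1, so 2 ≤ n
    have hm1 : mOf grid = 1 := by omega
    have hn2 : 1 < nOf grid := by
      by_contra hc
      have : nOf grid - 1 = 0 := by omega
      exact hne ⟨by omega, this⟩
    rw [Bool.and_eq_false_iff] at hleft
    rcases hleft with hd | hfl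
    · rw [decide_eq_false_iff_not] at hd; omega
    · by_cases hn3 : 2 < nOf grid
      · exact ⟨mOf grid - 1, nOf grid - 1 - 1, by omega, by omega, by omega, by omega, hfl⟩
      · exfalso
        have : nOf grid - 1 - 1 = 0 := by omega
        rw [show mOf grid - 1 = 0 from by omega, this, hstart] at hfl
        cases hfl

-- every non-end in-range cell of an all-open grid is forward reachable
theorem allF (grid : List (List Int))
    (hall : ∀ i, i < mOf grid → ∀ j, j < nOf grid → ¬(i = 0 ∧ j = 0) →
      ¬(i = mOf grid - 1 ∧ j = nOf grid - 1) → (grid.getD i []).getD j 0 ≠ 0) :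
    ∀ i j, i < mOf grid → j < nOf grid → ¬(i = mOf grid - 1 ∧ j = nOf grid - 1) →
      fM grid i j = true := by
  have key : ∀ s i j, i + j = s → i < mOf grid → j < nOf grid →
      ¬(i = mOf grid - 1 ∧ j = nOf grid - 1) → fM grid i j = true := by
    intro s
    induction s using Nat.strong_induction_on with
    | _ s ih =>
      intro i j hs hi hj hne
      by_cases h0 : i = 0 ∧ j = 0
      · rw [h0.1, h0.2]; simp [fM]
      · rw [fM_expand grid i j h0]
        have hgb : gB grid i j = true := by
          unfold gB
          simp only [Bool.and_eq_true, decide_eq_true_eq]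
          exact ⟨⟨hi, hj⟩, hall i hi j hj h0 hne⟩
        rw [hgb, Bool.true_and]
        rcases Nat.eq_zero_or_pos i with hi0 | hi0
        · have hj0 : 0 < j := by omega
          have hpre : fM grid i (j-1) = true := by
            apply ih (i + (j-1)) (by omega) i (j-1) rfl hi (by omega)
            rintro ⟨e1, e2⟩; omega
          rw [hpre]
          simp [hj0]
        · have hpre : fM grid (i-1) j = true := by
            apply ih ((i-1) + j) (by omega) (i-1) j rfl (by omega) hj
            rintro ⟨e1, e2⟩; omega
          rw [hpre]
          simp [hi0]
  intro i j hi hj hne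
  exact key (i+j) i j rfl hi hj hne

-- every non-start in-range cell of an all-open grid can reach the end
theorem allG (grid : List (List Int)) (hm : 1 ≤ mOf grid) (hn : 1 ≤ nOf grid)
    (hall : ∀ i, i < mOf grid → ∀ j, j < nOf grid → ¬(i = 0 ∧ j = 0) →
      ¬(i = mOf grid - 1 ∧ j = nOf grid - 1) → (grid.getD i []).getD j 0 ≠ 0) :
    ∀ i j, i < mOf grid → j < nOf grid → ¬(i = 0 ∧ j = 0) →
      g2 grid i j = true := by
  have key : ∀ s i j, (mOf grid - 1 - i) + (nOf grid - 1 - j) = s →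
      i < mOf grid → j < nOf grid → ¬(i = 0 ∧ j = 0) → g2 grid i j = true := by
    intro s
    induction s using Nat.strong_induction_on with
    | _ s ih =>
      intro i j hs hi hj h0
      by_cases hend : i = mOf grid - 1 ∧ j = nOf grid - 1
      · rw [hend.1, hend.2]; exact g2_end grid hm hn
      · rw [g2_expand grid i j hi hj hend]
        have hgb : gB grid i j = true := by
          unfold gB
          simp only [Bool.and_eq_true, decide_eq_true_eq]
          exact ⟨⟨hi, hj⟩, hall i hi j hj h0 hend⟩
        rw [hgb, Bool.true_and]
        rcases Nat.lt_or_ge (i+1) (mOf grid) with hi2 | hi2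
        · have hsuc : g2 grid (i+1) j = true := by
            apply ih ((mOf grid - 1 - (i+1)) + (nOf grid - 1 - j)) (by omega)
              (i+1) j rfl hi2 hj (by rintro ⟨e1, e2⟩; omega)
          rw [hsuc, Bool.true_or]
        · have hj2 : j + 1 < nOf grid := by omega
          have hsuc : g2 grid i (j+1) = true := by
            apply ih ((mOf grid - 1 - i) + (nOf grid - 1 - (j+1))) (by omega)
              i (j+1) rfl hi hj2 (by rintro ⟨e1, e2⟩; omega)
          rw [hsuc, Bool.or_true]
  intro i j hi hj h0
  exact key ((mOf grid - 1 - i) + (nOf grid - 1 - j)) i j rfl hi hj h0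

-- master math equivalence outside the change region
theorem mathEquiv (grid : List (List Int)) (hm : 1 ≤ mOf grid) (hn : 1 ≤ nOf grid)
    (hnD : ¬ D_isPossibleToCutPath grid) :
    ((∃ i j, i < mOf grid ∧ j < nOf grid ∧ ¬(i = 0 ∧ j = 0) ∧
        ¬(i = mOf grid - 1 ∧ j = nOf grid - 1) ∧
        aM grid i j * b2 grid i j = tgt grid)
      ↔ (fM grid (mOf grid - 1) (nOf grid - 1) = false ∨
          ∃ K, 1 ≤ K ∧ K < mOf grid + nOf grid - 2 ∧ cntF grid K = 1)) := by
  by_cases ht : fM grid (mOf grid - 1) (nOf grid - 1) = true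
  · have hT : 0 < tgt grid := (aM_pos_iff grid _ _).mpr ht
    constructor
    · rintro ⟨i, j, hi, hj, h0, hendc, hprod⟩
      have hKr : 1 ≤ i + j ∧ i + j ≤ mOf grid + nOf grid - 3 := by omega
      refine Or.inr ⟨i + j, hKr.1, by omega, ?_⟩
      exact (diag_t_case grid hm hn hT (i+j) hKr.1 hKr.2).mp ⟨i, j, hi, hj, rfl, hprod⟩
    · rintro (hcon | ⟨K, hK1, hK2, hcond⟩)
      · rw [ht] at hcon; cases hcon
      · obtain ⟨i, j, hi, hj, hij, hprod⟩ :=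
          (diag_t_case grid hm hn hT K hK1 (by omega)).mpr hcond
        exact ⟨i, j, hi, hj, by omega, by omega, hprod⟩
  · have hdis : fM grid (mOf grid - 1) (nOf grid - 1) = false := by
      cases h : fM grid (mOf grid - 1) (nOf grid - 1)
      · rfl
      · exact absurd h ht
    have hT : tgt grid = 0 := by
      have := (aM_pos_iff grid (mOf grid - 1) (nOf grid - 1)).not.mpr ht
      unfold tgt
      omega
    constructor
    · intro _; exact Or.inl hdis
    · intro _
      -- produce an intermediate cell with zero product
      unfold D_isPossibleToCutPath at hnD
      push_neg at hnD
      have hm' : mOf grid = grid.length := rfl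
      have hn' : nOf grid = (grid.getD 0 []).length := rfl
      by_cases hends : (grid.getD (grid.length - 1) []).getD ((grid.getD 0 []).length - 1) 0 = 0
      · -- the end cell itself is 0; then ¬D_ yields a 1×1 grid (impossible) or a zero cell
        have hsz : 3 ≤ grid.length + (grid.getD 0 []).length := by
          by_contra hc
          have ha := hm; rw [hm'] at ha
          have hb := hn; rw [hn'] at hb
          have e1 : grid.length = 1 := by omega
          have e2 : (grid.getD 0 []).length = 1 := by omega
          have hcon : fM grid (mOf grid - 1) (nOf grid - 1) = true := by
            rw [hm', hn', e1, e2]; simp [fM]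
          rw [hcon] at hdis
          cases hdis
        obtain ⟨i, hi, j, hj, h0i, hni, hz⟩ := hnD hsz hends
        have h0 : ¬(i = 0 ∧ j = 0) := by rintro ⟨e1, e2⟩; exact h0i e1 e2
        have hnend : ¬(i = grid.length - 1 ∧ j = (grid.getD 0 []).length - 1) := by
          rintro ⟨e1, e2⟩; exact hni e1 e2
        refine ⟨i, j, by omega, by omega, h0, by rw [hm', hn']; exact hnend, ?_⟩
        have hgb : gB grid i j = false := by
          unfold gB; rw [hz]; simp
        rw [aM_eq grid i j h0, if_neg (by simp [hgb]), Nat.zero_mul, hT]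
      · -- the end cell is open: an unreachable intermediate cell exists
        have hend : gB grid (mOf grid - 1) (nOf grid - 1) = true := by
          unfold gB
          simp only [Bool.and_eq_true, decide_eq_true_eq]
          refine ⟨⟨by omega, by omega⟩, ?_⟩
          rw [hm', hn'] at *
          exact hends
        obtain ⟨i, j, hi, hj, h0, hnend, hf⟩ := exists_unreachable grid hm hn hdis hend
        refine ⟨i, j, hi, hj, h0, hnend, ?_⟩
        have : aM grid i j = 0 := by
          have := (aM_pos_iff grid i j).not.mpr (by rw [hf]; simp)
          omega
        rw [this, Nat.zero_mul, hT]

-- ---------- table machinery ----------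

theorem pvG2_cast (t : List (List Int)) (p q : ℕ) :
    pvG2 t (p : Int) (q : Int) = (t.getD p []).getD q 0 := by
  simp [pvG2]

theorem pvG2B_cast (t : List (List Bool)) (p q : ℕ) :
    pvG2B t (p : Int) (q : Int) = (t.getD p []).getD q false := by
  simp [pvG2B]

theorem pvS2_cast (t : List (List Int)) (p q : ℕ) (v : Int) :
    pvS2 t (p : Int) (q : Int) v = t.set p ((t.getD p []).set q v) := by
  simp [pvS2]

theorem getD_mem_row {α : Type} (t : List (List α)) (a : ℕ) (ha : a < t.length) :
    t.getD a [] ∈ t := by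
  rw [List.getD_eq_getElem?_getD, List.getElem?_eq_getElem ha]
  exact List.getElem_mem ha

theorem read_pvS2 (t : List (List Int)) (M N : ℕ) (ht1 : t.length = M+1)
    (ht2 : ∀ row ∈ t, row.length = N+1) (a b p q : ℕ) (ha : a < M+1) (hb : b < N+1)
    (v : Int) :
    ((t.set a ((t.getD a []).set b v)).getD p []).getD q 0
      = if p = a ∧ q = b then v else (t.getD p []).getD q 0 := by
  have hrowlen : (t.getD a []).length = N+1 :=
    ht2 _ (getD_mem_row t a (by omega))
  rw [getD_set' t a p _ [] (by omega)]
  by_cases hp : p = a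
  · rw [if_pos hp]
    rw [getD_set' (t.getD a []) b q v 0 (by omega)]
    by_cases hq : q = b
    · rw [if_pos hq, if_pos ⟨hp, hq⟩]
    · rw [if_neg hq, if_neg (by tauto), hp]
  · rw [if_neg hp, if_neg (by tauto)]

theorem shape_pvS2 (t : List (List Int)) (M N : ℕ) (ht1 : t.length = M+1)
    (ht2 : ∀ row ∈ t, row.length = N+1) (a b : ℕ) (v : Int) :
    (t.set a ((t.getD a []).set b v)).length = M+1 ∧
      ∀ row ∈ t.set a ((t.getD a []).set b v), row.length = N+1 := by
  refine ⟨by simp [ht1], ?_⟩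
  intro row hrow
  rcases List.mem_or_eq_of_mem_set hrow with h | h
  · exact ht2 _ h
  · rcases Nat.lt_or_ge a t.length with ha | ha
    · rw [h, List.length_set]
      exact ht2 _ (getD_mem_row t a ha)
    · rw [List.set_eq_of_length_le (by omega)] at hrow
      exact ht2 _ hrow

-- F1 bookkeeping
theorem F1_new (grid : List (List Int)) (r c : ℕ) :
    F1 grid r (c+1) (r+1) (c+1) = (aM grid r c : Int) := by
  unfold F1
  rw [if_neg (by omega), if_pos (by omega)]
  simp

theorem F1_mono (grid : List (List Int)) (r c p q : ℕ) (h : ¬(p = r+1 ∧ q = c+1)) :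
    F1 grid r (c+1) p q = F1 grid r c p q := by
  unfold F1
  split_ifs <;> first | rfl | omega

theorem F1_eval_proc (grid : List (List Int)) (r c p q : ℕ) (hp : 1 ≤ p) (hq : 1 ≤ q)
    (h : p ≤ r ∨ (p = r+1 ∧ q ≤ c)) : F1 grid r c p q = (aM grid (p-1) (q-1) : Int) := by
  unfold F1; rw [if_neg (by omega), if_pos h]

theorem F1_eval_unproc (grid : List (List Int)) (r c p q : ℕ) (hp : 1 ≤ p) (hq : 1 ≤ q)
    (h : ¬(p ≤ r ∨ (p = r+1 ∧ q ≤ c))) :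
    F1 grid r c p q = if p = 1 ∧ q = 1 then 1 else 0 := by
  unfold F1; rw [if_neg (by omega), if_neg h]

theorem F1_eval_zero (grid : List (List Int)) (r c p q : ℕ) (h : p = 0 ∨ q = 0) :
    F1 grid r c p q = 0 := by
  unfold F1; rw [if_pos h]

theorem F1_skip (grid : List (List Int)) (r c : ℕ) (hgb : gB grid r c = false) :
    F1 grid r c (r+1) (c+1) = (aM grid r c : Int) := by
  have ha : aM grid r c = if r = 0 ∧ c = 0 then 1 else 0 := by
    rcases Nat.eq_zero_or_pos (r + c) with h0 | h0
    · have h00 : r = 0 ∧ c = 0 := by omega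
      rw [if_pos h00, h00.1, h00.2]; simp [aM]
    · rw [if_neg (by omega), aM_eq grid r c (by omega), if_neg (by simp [hgb])]
  rw [F1_eval_unproc grid r c (r+1) (c+1) (by omega) (by omega) (by omega), ha]
  split_ifs <;> first | rfl | omega

theorem F1_write (grid : List (List Int)) (r c : ℕ) (hgb : gB grid r c = true) :
    F1 grid r c (r+1) (c+1) + (F1 grid r c r (c+1) + F1 grid r c (r+1) c)
      = (aM grid r c : Int) := by
  rw [F1_eval_unproc grid r c (r+1) (c+1) (by omega) (by omega) (by omega)]
  rcases r with _ | r <;> rcases c with _ | c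
  · rw [F1_eval_zero grid 0 0 0 1 (by omega), F1_eval_zero grid 0 0 1 0 (by omega)]
    rw [if_pos ⟨rfl, rfl⟩, show aM grid 0 0 = 1 from by simp [aM]]
    norm_num
  · rw [F1_eval_zero grid 0 (c+1) 0 (c+2) (by omega),
      F1_eval_proc grid 0 (c+1) 1 (c+1) (by omega) (by omega) (by omega)]
    rw [if_neg (by omega)]
    simp [aM, hgb]
  · rw [F1_eval_zero grid (r+1) 0 (r+2) 0 (by omega),
      F1_eval_proc grid (r+1) 0 (r+1) 1 (by omega) (by omega) (by omega)]
    rw [if_neg (by omega)]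
    simp [aM, hgb]
  · rw [F1_eval_proc grid (r+1) (c+1) (r+1) (c+2) (by omega) (by omega) (by omega),
      F1_eval_proc grid (r+1) (c+1) (r+2) (c+1) (by omega) (by omega) (by omega)]
    rw [if_neg (by omega)]
    simp [aM, hgb]

theorem F1_rowend (grid : List (List Int)) (r p q : ℕ) (hq : q ≤ nOf grid) :
    F1 grid r (nOf grid) p q = F1 grid (r+1) 0 p q := by
  unfold F1
  split_ifs <;> first | rfl | omega

theorem hcond_gB (grid : List (List Int)) (r c : ℕ) (hr : r < mOf grid)
    (hc : c < nOf grid) :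
    ((pvG2 grid (r : Int) (c : Int) ≠ 0) ↔ gB grid r c = true) := by
  rw [pvG2_cast]
  unfold gB mOf nOf
  simp only [Bool.and_eq_true, decide_eq_true_eq]
  constructor
  · intro h; exact ⟨⟨hr, hc⟩, h⟩
  · rintro ⟨_, h⟩; exact h

theorem getD_replicate' {α : Type} (n p : ℕ) (a d : α) (hp : p < n) :
    (List.replicate n a).getD p d = a := by
  rw [List.getD_eq_getElem?_getD, List.getElem?_replicate, if_pos hp]
  rfl

theorem inv1_step (grid : List (List Int)) (r c : ℕ) (hr : r < mOf grid)
    (hc : c < nOf grid) (t : List (List Int)) (h : Inv1 grid t r c) :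
    Inv1 grid
      (if pvG2 grid ((r:Int)+1-1) ((c:Int)+1-1) ≠ 0 then
        pvS2 t ((r:Int)+1) ((c:Int)+1)
          (pvG2 t ((r:Int)+1) ((c:Int)+1) +
            (pvG2 t ((r:Int)+1-1) ((c:Int)+1) + pvG2 t ((r:Int)+1) ((c:Int)+1-1)))
      else t) r (c+1) := by
  obtain ⟨ht1, ht2, hread⟩ := h
  have e0 : (r:Int)+1-1 = ((r:ℕ):Int) := by push_cast; ring
  have e1 : (r:Int)+1 = ((r+1:ℕ):Int) := by push_cast; ring
  have e0' : (c:Int)+1-1 = ((c:ℕ):Int) := by push_cast; ring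
  have e1' : (c:Int)+1 = ((c+1:ℕ):Int) := by push_cast; ring
  rw [e0, e0', e1, e1']
  by_cases hgb : gB grid r c = true
  · rw [if_pos ((hcond_gB grid r c hr hc).mpr hgb)]
    rw [pvS2_cast, pvG2_cast, pvG2_cast, pvG2_cast,
      hread (r+1) (c+1) (by omega) (by omega),
      hread r (c+1) (by omega) (by omega),
      hread (r+1) c (by omega) (by omega)]
    obtain ⟨hs1, hs2⟩ := shape_pvS2 t (mOf grid) (nOf grid) ht1 ht2 (r+1) (c+1) _
    refine ⟨hs1, hs2, ?_⟩
    intro p q hp hq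
    rw [read_pvS2 t (mOf grid) (nOf grid) ht1 ht2 (r+1) (c+1) p q (by omega) (by omega) _]
    by_cases hpq : p = r+1 ∧ q = c+1
    · rw [if_pos hpq, hpq.1, hpq.2, F1_new, F1_write grid r c hgb]
    · rw [if_neg hpq, F1_mono grid r c p q hpq, hread p q hp hq]
  · rw [if_neg (by rw [hcond_gB grid r c hr hc]; simp [hgb])]
    refine ⟨ht1, ht2, ?_⟩
    intro p q hp hq
    rw [hread p q hp hq]
    by_cases hpq : p = r+1 ∧ q = c+1
    · rw [hpq.1, hpq.2, F1_new,
        F1_skip grid r c (by rw [← Bool.not_eq_true]; exact hgb)]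
    · rw [F1_mono grid r c p q hpq]

-- ---------- port bridges ----------

theorem dp1_bridge (grid : List (List Int)) (hm : 1 ≤ mOf grid) (hn : 1 ≤ nOf grid)
    (hrows : ∀ r ∈ grid, nOf grid ≤ r.length) :
    Inv1 grid
      ((PySem.List.pyRange 1 ((grid.length : Int)+1) 1).foldl (fun d i =>
        (PySem.List.pyRange 1 (((grid.getD 0 []).length : Int)+1) 1).foldl (fun d j =>
          if pvG2 grid (i-1) (j-1) ≠ 0 then
            pvS2 d i j (pvG2 d i j + (pvG2 d (i-1) j + pvG2 d i (j-1)))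
          else d) d)
        (pvS2 ((PySem.List.pyRange 0 ((grid.length : Int)+1) 1).map (fun _ =>
          (PySem.List.pyRange 0 (((grid.getD 0 []).length : Int)+1) 1).map (fun _ => (0:Int)))) 1 1 1))
      (mOf grid) 0 := by
  have hinit : ((PySem.List.pyRange 0 ((grid.length : Int)+1) 1).map (fun _ =>
      (PySem.List.pyRange 0 (((grid.getD 0 []).length : Int)+1) 1).map (fun _ => (0:Int))))
      = List.replicate (mOf grid + 1) (List.replicate (nOf grid + 1) (0:Int)) := by
    simp only [List.map_const', PySem.List.length_pyRange_one]
    rw [show ((grid.length : Int)+1-0).toNat = mOf grid + 1 from by unfold mOf; omega,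
      show (((grid.getD 0 []).length : Int)+1-0).toNat = nOf grid + 1 from by unfold nOf; omega]
  have hT0len : (List.replicate (mOf grid + 1) (List.replicate (nOf grid + 1) (0:Int))).length
      = mOf grid + 1 := by simp
  have hT0rows : ∀ row ∈ List.replicate (mOf grid + 1) (List.replicate (nOf grid + 1) (0:Int)),
      row.length = nOf grid + 1 := by
    intro row hrow
    rw [List.eq_of_mem_replicate hrow]
    simp
  have hseed : Inv1 grid
      (pvS2 (List.replicate (mOf grid + 1) (List.replicate (nOf grid + 1) (0:Int))) 1 1 1) 0 0 := by
    rw [show (1:Int) = ((1:ℕ):Int) from by norm_num, pvS2_cast]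
    obtain ⟨hs1, hs2⟩ := shape_pvS2 _ (mOf grid) (nOf grid) hT0len hT0rows 1 1 _
    refine ⟨hs1, hs2, ?_⟩
    intro p q hp hq
    rw [read_pvS2 _ (mOf grid) (nOf grid) hT0len hT0rows 1 1 p q (by omega) (by omega) _]
    by_cases hpq : p = 1 ∧ q = 1
    · rw [if_pos hpq, hpq.1, hpq.2,
        F1_eval_unproc grid 0 0 1 1 (by omega) (by omega) (by omega), if_pos ⟨rfl, rfl⟩]
      norm_num
    · rw [if_neg hpq,
        getD_replicate' (mOf grid + 1) p (List.replicate (nOf grid + 1) (0:Int)) [] (by omega),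
        getD_replicate' (nOf grid + 1) q (0:Int) 0 (by omega)]
      by_cases hz : p = 0 ∨ q = 0
      · rw [F1_eval_zero grid 0 0 p q hz]
      · rw [F1_eval_unproc grid 0 0 p q (by omega) (by omega) (by omega), if_neg hpq]
  rw [hinit]
  have aux : ∀ r, r ≤ mOf grid → Inv1 grid
      ((PySem.List.pyRange 1 ((r:Int)+1) 1).foldl (fun d i =>
        (PySem.List.pyRange 1 (((grid.getD 0 []).length : Int)+1) 1).foldl (fun d j =>
          if pvG2 grid (i-1) (j-1) ≠ 0 then
            pvS2 d i j (pvG2 d i j + (pvG2 d (i-1) j + pvG2 d i (j-1)))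
          else d) d)
        (pvS2 (List.replicate (mOf grid + 1) (List.replicate (nOf grid + 1) (0:Int))) 1 1 1))
      r 0 := by
    intro r
    induction r with
    | zero =>
      intro _
      rw [show ((0:ℕ):Int)+1 = 1 from by norm_num, PySem.List.pyRange_one_eq_nil (a := 1) (b := 1) (by omega)]
      exact hseed
    | succ r ih =>
      intro hr
      rw [show ((r+1:ℕ):Int)+1 = ((r:Int)+1)+1 from by push_cast; ring,
        PySem.List.pyRange_one_succ_right (a := 1) (b := (r:Int)+1) (by omega),
        List.foldl_append, List.foldl_cons, List.foldl_nil]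
      have hinner : ∀ c, c ≤ nOf grid → Inv1 grid
          ((PySem.List.pyRange 1 ((c:Int)+1) 1).foldl (fun d j =>
            if pvG2 grid ((r:Int)+1-1) (j-1) ≠ 0 then
              pvS2 d ((r:Int)+1) j
                (pvG2 d ((r:Int)+1) j + (pvG2 d ((r:Int)+1-1) j + pvG2 d ((r:Int)+1) (j-1)))
            else d)
            ((PySem.List.pyRange 1 ((r:Int)+1) 1).foldl (fun d i =>
              (PySem.List.pyRange 1 (((grid.getD 0 []).length : Int)+1) 1).foldl (fun d j =>
                if pvG2 grid (i-1) (j-1) ≠ 0 then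
                  pvS2 d i j (pvG2 d i j + (pvG2 d (i-1) j + pvG2 d i (j-1)))
                else d) d)
              (pvS2 (List.replicate (mOf grid + 1) (List.replicate (nOf grid + 1) (0:Int))) 1 1 1)))
          r c := by
        intro c
        induction c with
        | zero =>
          intro _
          rw [show ((0:ℕ):Int)+1 = 1 from by norm_num, PySem.List.pyRange_one_eq_nil (a := 1) (b := 1) (by omega)]
          exact ih (by omega)
        | succ c ihc =>
          intro hc
          rw [show ((c+1:ℕ):Int)+1 = ((c:Int)+1)+1 from by push_cast; ring,
            PySem.List.pyRange_one_succ_right (a := 1) (b := (c:Int)+1) (by omega),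
            List.foldl_append, List.foldl_cons, List.foldl_nil]
          exact inv1_step grid r c (by omega) (by omega) _ (ihc (by omega))
      have hfin := hinner (nOf grid) le_rfl
      rw [show ((nOf grid : ℕ):Int)+1 = ((grid.getD 0 []).length : Int)+1 from by unfold nOf; norm_num]
        at hfin
      obtain ⟨hs1, hs2, hread⟩ := hfin
      exact ⟨hs1, hs2, fun p q hp hq => (hread p q hp hq).trans (F1_rowend grid r p q hq)⟩
  have hfin := aux (mOf grid) le_rfl
  rw [show ((mOf grid : ℕ):Int)+1 = (grid.length : Int)+1 from by unfold mOf; norm_num] at hfin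
  exact hfin

-- F2 bookkeeping
theorem F2_eval_zero (grid : List (List Int)) (r c p q : ℕ)
    (h : p = mOf grid ∨ q = nOf grid) : F2 grid r c p q = 0 := by
  unfold F2; rw [if_pos h]

theorem F2_eval_proc (grid : List (List Int)) (r c p q : ℕ)
    (h1 : ¬(p = mOf grid ∨ q = nOf grid))
    (h2 : mOf grid - r ≤ p ∨ (p = mOf grid - 1 - r ∧ nOf grid - c ≤ q)) :
    F2 grid r c p q = (b2 grid p q : Int) := by
  unfold F2; rw [if_neg h1, if_pos h2]

theorem F2_eval_unproc (grid : List (List Int)) (r c p q : ℕ)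
    (h1 : ¬(p = mOf grid ∨ q = nOf grid))
    (h2 : ¬(mOf grid - r ≤ p ∨ (p = mOf grid - 1 - r ∧ nOf grid - c ≤ q))) :
    F2 grid r c p q = if p = mOf grid - 1 ∧ q = nOf grid - 1 then 1 else 0 := by
  unfold F2; rw [if_neg h1, if_neg h2]

theorem F2_mono (grid : List (List Int)) (r c p q : ℕ) (hr : r < mOf grid)
    (hc : c < nOf grid)
    (h : ¬(p = mOf grid - 1 - r ∧ q = nOf grid - 1 - c)) :
    F2 grid r (c+1) p q = F2 grid r c p q := by
  unfold F2
  split_ifs <;> first | rfl | omega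

theorem F2_rowend (grid : List (List Int)) (r p q : ℕ) (hr : r < mOf grid)
    (hq : q ≤ nOf grid) :
    F2 grid r (nOf grid) p q = F2 grid (r+1) 0 p q := by
  unfold F2
  split_ifs <;> first | rfl | omega

theorem b2_oob (grid : List (List Int)) (p q : ℕ)
    (h : ¬(p < mOf grid ∧ q < nOf grid)) : b2 grid p q = 0 := by
  unfold b2; rw [if_neg h]

theorem inv2_step (grid : List (List Int)) (hm : 1 ≤ mOf grid) (hn : 1 ≤ nOf grid)
    (r c : ℕ) (hr : r < mOf grid) (hc : c < nOf grid) (t : List (List Int))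
    (h : Inv2 grid t r c) :
    Inv2 grid
      (if pvG2 grid ((grid.length : Int) - 1 - (r:Int)) (((grid.getD 0 []).length : Int) - 1 - (c:Int)) ≠ 0 then
        pvS2 t ((grid.length : Int) - 1 - (r:Int)) (((grid.getD 0 []).length : Int) - 1 - (c:Int))
          (pvG2 t ((grid.length : Int) - 1 - (r:Int)) (((grid.getD 0 []).length : Int) - 1 - (c:Int)) +
            (pvG2 t (((grid.length : Int) - 1 - (r:Int))+1) (((grid.getD 0 []).length : Int) - 1 - (c:Int)) +
              pvG2 t ((grid.length : Int) - 1 - (r:Int)) ((((grid.getD 0 []).length : Int) - 1 - (c:Int))+1)))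
      else t) r (c+1) := by
  obtain ⟨ht1, ht2, hread⟩ := h
  have hm' : mOf grid = grid.length := rfl
  have hn' : nOf grid = (grid.getD 0 []).length := rfl
  have e0 : (grid.length : Int) - 1 - (r:Int) = ((mOf grid - 1 - r : ℕ) : Int) := by
    rw [← hm']; omega
  have e1 : ((grid.length : Int) - 1 - (r:Int)) + 1 = ((mOf grid - 1 - r + 1 : ℕ) : Int) := by
    rw [← hm']; omega
  have e0' : ((grid.getD 0 []).length : Int) - 1 - (c:Int) = ((nOf grid - 1 - c : ℕ) : Int) := by
    rw [← hn']; omega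
  have e1' : (((grid.getD 0 []).length : Int) - 1 - (c:Int)) + 1
      = ((nOf grid - 1 - c + 1 : ℕ) : Int) := by
    rw [← hn']; omega
  rw [e1, e1', e0, e0']
  have hp0 : mOf grid - 1 - r < mOf grid := by omega
  have hq0 : nOf grid - 1 - c < nOf grid := by omega
  have hold : F2 grid r c (mOf grid - 1 - r) (nOf grid - 1 - c)
      = if mOf grid - 1 - r = mOf grid - 1 ∧ nOf grid - 1 - c = nOf grid - 1 then 1 else 0 :=
    F2_eval_unproc grid r c _ _ (by omega) (by omega)
  have hdown : F2 grid r c (mOf grid - 1 - r + 1) (nOf grid - 1 - c)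
      = (b2 grid (mOf grid - 1 - r + 1) (nOf grid - 1 - c) : Int) := by
    rcases Nat.lt_or_ge (mOf grid - 1 - r + 1) (mOf grid) with hlt | hge
    · exact F2_eval_proc grid r c _ _ (by omega) (by omega)
    · rw [F2_eval_zero grid r c _ _ (by omega), b2_oob grid _ _ (by omega)]
      rfl
  have hright : F2 grid r c (mOf grid - 1 - r) (nOf grid - 1 - c + 1)
      = (b2 grid (mOf grid - 1 - r) (nOf grid - 1 - c + 1) : Int) := by
    rcases Nat.lt_or_ge (nOf grid - 1 - c + 1) (nOf grid) with hlt | hge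
    · exact F2_eval_proc grid r c _ _ (by omega) (by omega)
    · rw [F2_eval_zero grid r c _ _ (by omega), b2_oob grid _ _ (by omega)]
      rfl
  have hnewval : ∀ hgb : gB grid (mOf grid - 1 - r) (nOf grid - 1 - c) = true,
      (if mOf grid - 1 - r = mOf grid - 1 ∧ nOf grid - 1 - c = nOf grid - 1 then (1:Int) else 0)
        + ((b2 grid (mOf grid - 1 - r + 1) (nOf grid - 1 - c) : Int)
          + (b2 grid (mOf grid - 1 - r) (nOf grid - 1 - c + 1) : Int))
      = (b2 grid (mOf grid - 1 - r) (nOf grid - 1 - c) : Int) := by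
    intro hgb
    by_cases hend : mOf grid - 1 - r = mOf grid - 1 ∧ nOf grid - 1 - c = nOf grid - 1
    · rw [if_pos hend, hend.1, hend.2,
        b2_oob grid _ _ (by omega), b2_oob grid _ _ (by omega), b2_end grid hm hn]
      norm_num
    · rw [if_neg hend,
        b2_expand grid _ _ hp0 hq0 (by omega), if_pos hgb]
      push_cast
      ring
  have hskipval : gB grid (mOf grid - 1 - r) (nOf grid - 1 - c) = false →
      (b2 grid (mOf grid - 1 - r) (nOf grid - 1 - c) : Int)
        = if mOf grid - 1 - r = mOf grid - 1 ∧ nOf grid - 1 - c = nOf grid - 1 then 1 else 0 := by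
    intro hgb
    by_cases hend : mOf grid - 1 - r = mOf grid - 1 ∧ nOf grid - 1 - c = nOf grid - 1
    · rw [if_pos hend, hend.1, hend.2, b2_end grid hm hn]
      rfl
    · rw [if_neg hend, b2_expand grid _ _ hp0 hq0 (by omega), if_neg (by simp [hgb])]
      rfl
  by_cases hgb : gB grid (mOf grid - 1 - r) (nOf grid - 1 - c) = true
  · rw [if_pos ((hcond_gB grid _ _ hp0 hq0).mpr hgb)]
    rw [pvS2_cast, pvG2_cast, pvG2_cast, pvG2_cast,
      hread _ _ (by omega) (by omega), hread _ _ (by omega) (by omega),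
      hread _ _ (by omega) (by omega), hold, hdown, hright]
    obtain ⟨hs1, hs2⟩ := shape_pvS2 t (mOf grid) (nOf grid) ht1 ht2 _ _ _
    refine ⟨hs1, hs2, ?_⟩
    intro p q hp hq
    rw [read_pvS2 t (mOf grid) (nOf grid) ht1 ht2 (mOf grid - 1 - r) (nOf grid - 1 - c)
      p q (by omega) (by omega) _]
    by_cases hpq : p = mOf grid - 1 - r ∧ q = nOf grid - 1 - c
    · rw [if_pos hpq, hpq.1, hpq.2, hnewval hgb,
        F2_eval_proc grid r (c+1) _ _ (by omega) (by omega)]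
    · rw [if_neg hpq, F2_mono grid r c p q hr hc hpq, hread p q hp hq]
  · rw [if_neg (by rw [hcond_gB grid _ _ hp0 hq0]; simp [hgb])]
    refine ⟨ht1, ht2, ?_⟩
    intro p q hp hq
    rw [hread p q hp hq]
    by_cases hpq : p = mOf grid - 1 - r ∧ q = nOf grid - 1 - c
    · rw [hpq.1, hpq.2, hold,
        F2_eval_proc grid r (c+1) _ _ (by omega) (by omega),
        hskipval (by rw [← Bool.not_eq_true]; exact hgb)]
    · rw [F2_mono grid r c p q hr hc hpq]

theorem dp2_bridge (grid : List (List Int)) (hm : 1 ≤ mOf grid) (hn : 1 ≤ nOf grid)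
    (hrows : ∀ r ∈ grid, nOf grid ≤ r.length) :
    Inv2 grid
      ((PySem.List.pyRange ((grid.length : Int)-1) (-1) (-1)).foldl (fun d i =>
        (PySem.List.pyRange (((grid.getD 0 []).length : Int)-1) (-1) (-1)).foldl (fun d j =>
          if pvG2 grid i j ≠ 0 then
            pvS2 d i j (pvG2 d i j + (pvG2 d (i+1) j + pvG2 d i (j+1)))
          else d) d)
        (pvS2 ((PySem.List.pyRange 0 ((grid.length : Int)+1) 1).map (fun _ =>
          (PySem.List.pyRange 0 (((grid.getD 0 []).length : Int)+1) 1).map (fun _ => (0:Int)))) (-2) (-2) 1))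
      (mOf grid) 0 := by
  have hinit : ((PySem.List.pyRange 0 ((grid.length : Int)+1) 1).map (fun _ =>
      (PySem.List.pyRange 0 (((grid.getD 0 []).length : Int)+1) 1).map (fun _ => (0:Int))))
      = List.replicate (mOf grid + 1) (List.replicate (nOf grid + 1) (0:Int)) := by
    simp only [List.map_const', PySem.List.length_pyRange_one]
    rw [show ((grid.length : Int)+1-0).toNat = mOf grid + 1 from by unfold mOf; omega,
      show (((grid.getD 0 []).length : Int)+1-0).toNat = nOf grid + 1 from by unfold nOf; omega]
  have hT0len : (List.replicate (mOf grid + 1) (List.replicate (nOf grid + 1) (0:Int))).length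
      = mOf grid + 1 := by simp
  have hT0rows : ∀ row ∈ List.replicate (mOf grid + 1) (List.replicate (nOf grid + 1) (0:Int)),
      row.length = nOf grid + 1 := by
    intro row hrow
    rw [List.eq_of_mem_replicate hrow]
    simp
  rw [hinit]
  have hrow0 : PySem.List.pyGetD
      (List.replicate (mOf grid + 1) (List.replicate (nOf grid + 1) (0:Int))) (-2) []
      = List.replicate (nOf grid + 1) (0:Int) := by
    rw [show (-2:Int) = -((2:ℕ):Int) from by norm_num,
      PySem.List.pyGetD_neg_natCast _ 2 _ (by omega) (by simp; omega)]
    simp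
  have hseedeq : pvS2 (List.replicate (mOf grid + 1) (List.replicate (nOf grid + 1) (0:Int)))
        (-2) (-2) 1
      = (List.replicate (mOf grid + 1) (List.replicate (nOf grid + 1) (0:Int))).set
          (mOf grid - 1) ((List.replicate (nOf grid + 1) (0:Int)).set (nOf grid - 1) 1) := by
    unfold pvS2
    rw [hrow0, show (-2:Int) = -((2:ℕ):Int) from by norm_num,
      pySetD_neg_ofNat' _ 2 _ (by omega) (by simp; omega),
      pySetD_neg_ofNat' _ 2 _ (by omega) (by simp; omega)]
    rw [List.length_replicate, List.length_replicate,
      show mOf grid + 1 - 2 = mOf grid - 1 from by omega,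
      show nOf grid + 1 - 2 = nOf grid - 1 from by omega]
  rw [hseedeq]
  have hseed : Inv2 grid
      ((List.replicate (mOf grid + 1) (List.replicate (nOf grid + 1) (0:Int))).set
        (mOf grid - 1) ((List.replicate (nOf grid + 1) (0:Int)).set (nOf grid - 1) 1)) 0 0 := by
    refine ⟨by simp, ?_, ?_⟩
    · intro row hrow
      rcases List.mem_or_eq_of_mem_set hrow with h | h
      · exact hT0rows _ h
      · rw [h, List.length_set, List.length_replicate]
    · intro p q hp hq
      rw [getD_set' _ (mOf grid - 1) p _ [] (by simp)]
      by_cases hp' : p = mOf grid - 1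
      · rw [if_pos hp', getD_set' _ (nOf grid - 1) q 1 0 (by simp)]
        by_cases hq' : q = nOf grid - 1
        · rw [if_pos hq', hp', hq',
            F2_eval_unproc grid 0 0 _ _ (by omega) (by omega), if_pos ⟨rfl, rfl⟩]
        · rw [if_neg hq', getD_replicate' (nOf grid + 1) q (0:Int) 0 (by omega)]
          by_cases hz : q = nOf grid
          · rw [F2_eval_zero grid 0 0 p q (Or.inr hz)]
          · rw [F2_eval_unproc grid 0 0 p q (by omega) (by omega), if_neg (by omega)]
      · rw [if_neg hp',
          getD_replicate' (mOf grid + 1) p (List.replicate (nOf grid + 1) (0:Int)) [] (by omega),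
          getD_replicate' (nOf grid + 1) q (0:Int) 0 (by omega)]
        by_cases hz : p = mOf grid ∨ q = nOf grid
        · rw [F2_eval_zero grid 0 0 p q hz]
        · rw [F2_eval_unproc grid 0 0 p q hz (by omega), if_neg (by omega)]
  simp only [PySem.List.pyRange_neg_one,
    show ((grid.length : Int) - 1 - (-1)).toNat = mOf grid from by unfold mOf; omega,
    show (((grid.getD 0 []).length : Int) - 1 - (-1)).toNat = nOf grid from by unfold nOf; omega]
  have aux : ∀ r, r ≤ mOf grid → Inv2 grid
      (((List.range r).map (fun k : ℕ => (grid.length : Int) - 1 - (k:Int))).foldl (fun d i =>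
        (((List.range (nOf grid)).map (fun k : ℕ => ((grid.getD 0 []).length : Int) - 1 - (k:Int))).foldl (fun d j =>
          if pvG2 grid i j ≠ 0 then
            pvS2 d i j (pvG2 d i j + (pvG2 d (i+1) j + pvG2 d i (j+1)))
          else d) d))
        ((List.replicate (mOf grid + 1) (List.replicate (nOf grid + 1) (0:Int))).set
          (mOf grid - 1) ((List.replicate (nOf grid + 1) (0:Int)).set (nOf grid - 1) 1)))
      r 0 := by
    intro r
    induction r with
    | zero => intro _; exact hseed
    | succ r ih =>
      intro hr
      rw [List.range_succ, List.map_append, List.foldl_append]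
      simp only [List.map_cons, List.map_nil, List.foldl_cons, List.foldl_nil]
      have hinner : ∀ c, c ≤ nOf grid → Inv2 grid
          (((List.range c).map (fun k : ℕ => ((grid.getD 0 []).length : Int) - 1 - (k:Int))).foldl (fun d j =>
            if pvG2 grid ((grid.length : Int) - 1 - (r:Int)) j ≠ 0 then
              pvS2 d ((grid.length : Int) - 1 - (r:Int)) j
                (pvG2 d ((grid.length : Int) - 1 - (r:Int)) j +
                  (pvG2 d (((grid.length : Int) - 1 - (r:Int))+1) j +
                    pvG2 d ((grid.length : Int) - 1 - (r:Int)) (j+1)))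
            else d)
            (((List.range r).map (fun k : ℕ => (grid.length : Int) - 1 - (k:Int))).foldl (fun d i =>
              (((List.range (nOf grid)).map (fun k : ℕ => ((grid.getD 0 []).length : Int) - 1 - (k:Int))).foldl (fun d j =>
                if pvG2 grid i j ≠ 0 then
                  pvS2 d i j (pvG2 d i j + (pvG2 d (i+1) j + pvG2 d i (j+1)))
                else d) d))
              ((List.replicate (mOf grid + 1) (List.replicate (nOf grid + 1) (0:Int))).set
                (mOf grid - 1) ((List.replicate (nOf grid + 1) (0:Int)).set (nOf grid - 1) 1))))
          r c := by
        intro c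
        induction c with
        | zero => intro _; exact ih (by omega)
        | succ c ihc =>
          intro hc
          rw [List.range_succ, List.map_append, List.foldl_append]
          simp only [List.map_cons, List.map_nil, List.foldl_cons, List.foldl_nil]
          exact inv2_step grid hm hn r c (by omega) (by omega) _ (ihc (by omega))
      obtain ⟨hs1, hs2, hread⟩ := hinner (nOf grid) le_rfl
      exact ⟨hs1, hs2, fun p q hp hq =>
        (hread p q hp hq).trans (F2_rowend grid r p q (by omega) hq)⟩
  exact aux (mOf grid) le_rfl

theorem gB_decide (grid : List (List Int)) (r c : ℕ) (hr : r < mOf grid)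
    (hc : c < nOf grid) :
    decide ((grid.getD r []).getD c 0 ≠ 0) = gB grid r c := by
  unfold gB mOf nOf at *
  rw [decide_eq_true hr, decide_eq_true hc, Bool.true_and, Bool.true_and]

theorem g2_oob (grid : List (List Int)) (i j : ℕ)
    (h : ¬(i < mOf grid ∧ j < nOf grid)) : g2 grid i j = false := by
  unfold g2
  by_cases h1 : i < mOf grid
  · have h2 : ¬ j < nOf grid := fun h2 => h ⟨h1, h2⟩
    simp [h2]
  · simp [h1]

theorem fval (grid : List (List Int)) (r c : ℕ) (hr : r < mOf grid) (hc : c < nOf grid) :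
    (if ((r:Int) = 0 ∧ (c:Int) = 0) then true
     else decide (pvG2 grid (r:Int) (c:Int) ≠ 0) &&
       ((if 0 < (r:Int) then pvG2B (EF grid r) ((r:Int)-1) (c:Int) else false) ||
        (if 0 < (c:Int) then
          PySem.List.pyGetD ((List.range c).map (fun j => fM grid r j)) ((c:Int)-1) false
        else false)))
    = fM grid r c := by
  have hgd : decide (pvG2 grid (r:Int) (c:Int) ≠ 0) = gB grid r c := by
    rw [pvG2_cast]; exact gB_decide grid r c hr hc
  rcases r with _ | r <;> rcases c with _ | c
  · rw [if_pos ⟨rfl, rfl⟩]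
    simp [fM]
  · rw [if_neg (by push_cast; omega), hgd, if_neg (by simp), if_pos (by positivity)]
    rw [show ((c+1:ℕ):Int) - 1 = ((c:ℕ):Int) from by push_cast; ring,
      PySem.List.pyGetD_natCast, getD_map_range' _ (c+1) c false (by omega)]
    simp [fM]
  · rw [if_neg (by push_cast; omega), hgd, if_pos (by positivity), if_neg (by simp)]
    rw [show ((r+1:ℕ):Int) - 1 = ((r:ℕ):Int) from by push_cast; ring,
      pvG2B_cast]
    unfold EF
    rw [getD_map_range' _ (r+1) r [] (by omega), getD_map_range' _ (nOf grid) 0 false (by omega)]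
    simp [fM]
  · rw [if_neg (by push_cast; omega), hgd, if_pos (by positivity), if_pos (by positivity)]
    rw [show ((r+1:ℕ):Int) - 1 = ((r:ℕ):Int) from by push_cast; ring,
      show ((c+1:ℕ):Int) - 1 = ((c:ℕ):Int) from by push_cast; ring,
      pvG2B_cast, PySem.List.pyGetD_natCast,
      getD_map_range' _ (c+1) c false (by omega)]
    unfold EF
    rw [getD_map_range' _ (r+1) r [] (by omega),
      getD_map_range' _ (nOf grid) (c+1) false (by omega)]
    simp [fM]

theorem f_bridge (grid : List (List Int)) (hm : 1 ≤ mOf grid) (hn : 1 ≤ nOf grid)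
    (hrows : ∀ r ∈ grid, nOf grid ≤ r.length) :
    ((PySem.List.pyRange 0 (grid.length : Int) 1).foldl (fun f i =>
      f ++ [(PySem.List.pyRange 0 ((grid.getD 0 []).length : Int) 1).foldl (fun row j =>
        row ++ [if i = 0 ∧ j = 0 then true
          else
            decide (pvG2 grid i j ≠ 0) &&
              ((if 0 < i then pvG2B f (i-1) j else false) ||
               (if 0 < j then PySem.List.pyGetD row (j-1) false else false))]) []]) [])
      = EF grid (mOf grid) := by
  have aux : ∀ r, r ≤ mOf grid →
      ((PySem.List.pyRange 0 (r:Int) 1).foldl (fun f i =>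
        f ++ [(PySem.List.pyRange 0 ((grid.getD 0 []).length : Int) 1).foldl (fun row j =>
          row ++ [if i = 0 ∧ j = 0 then true
            else
              decide (pvG2 grid i j ≠ 0) &&
                ((if 0 < i then pvG2B f (i-1) j else false) ||
                 (if 0 < j then PySem.List.pyGetD row (j-1) false else false))]) []]) [])
        = EF grid r := by
    intro r
    induction r with
    | zero =>
      intro _
      rw [show ((0:ℕ):Int) = 0 from rfl, PySem.List.pyRange_one_eq_nil (a := 0) (b := 0) (by omega)]
      rfl
    | succ r ih =>
      intro hr
      rw [show ((r+1:ℕ):Int) = ((r:ℕ):Int)+1 from by push_cast; ring,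
        PySem.List.pyRange_one_succ_right (a := 0) (b := (r:Int)) (by omega),
        List.foldl_append, List.foldl_cons, List.foldl_nil, ih (by omega)]
      have hinner : ∀ c, c ≤ nOf grid →
          ((PySem.List.pyRange 0 (c:Int) 1).foldl (fun row j =>
            row ++ [if (r:Int) = 0 ∧ j = 0 then true
              else
                decide (pvG2 grid (r:Int) j ≠ 0) &&
                  ((if 0 < (r:Int) then pvG2B (EF grid r) ((r:Int)-1) j else false) ||
                   (if 0 < j then PySem.List.pyGetD row (j-1) false else false))]) [])
            = (List.range c).map (fun j => fM grid r j) := by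
        intro c
        induction c with
        | zero =>
          intro _
          rw [show ((0:ℕ):Int) = 0 from rfl,
            PySem.List.pyRange_one_eq_nil (a := 0) (b := 0) (by omega)]
          rfl
        | succ c ihc =>
          intro hc
          rw [show ((c+1:ℕ):Int) = ((c:ℕ):Int)+1 from by push_cast; ring,
            PySem.List.pyRange_one_succ_right (a := 0) (b := (c:Int)) (by omega),
            List.foldl_append, List.foldl_cons, List.foldl_nil, ihc (by omega),
            fval grid r c (by omega) (by omega),
            List.range_succ, List.map_append]
          rfl
      rw [show ((grid.getD 0 []).length : Int) = ((nOf grid : ℕ):Int) from rfl,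
        hinner (nOf grid) le_rfl]
      unfold EF
      rw [List.range_succ, List.map_append]
      rfl
  have hfin := aux (mOf grid) le_rfl
  rw [show ((mOf grid : ℕ):Int) = (grid.length : Int) from by unfold mOf; norm_num] at hfin
  exact hfin

theorem g_bridge (grid : List (List Int)) (hm : 1 ≤ mOf grid) (hn : 1 ≤ nOf grid)
    (hrows : ∀ r ∈ grid, nOf grid ≤ r.length) :
    ((PySem.List.pyRange ((grid.length : Int)-1) (-1) (-1)).foldl (fun g i =>
      ((PySem.List.pyRange (((grid.getD 0 []).length : Int)-1) (-1) (-1)).foldl (fun row j =>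
        PySem.List.pySetD row j (
          if i = (grid.length : Int)-1 ∧ j = ((grid.getD 0 []).length : Int)-1 then true
          else
            decide (pvG2 grid i j ≠ 0) &&
              ((if i < (grid.length : Int)-1 then pvG2B g 0 j else false) ||
               (if j < ((grid.getD 0 []).length : Int)-1 then PySem.List.pyGetD row (j+1) false else false))))
        ((PySem.List.pyRange 0 ((grid.getD 0 []).length : Int) 1).map (fun _ => false))) :: g) [])
      = EG grid (mOf grid) := by
  simp only [PySem.List.pyRange_neg_one,
    show ((grid.length : Int) - 1 - (-1)).toNat = mOf grid from by unfold mOf; omega,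
    show (((grid.getD 0 []).length : Int) - 1 - (-1)).toNat = nOf grid from by unfold nOf; omega]
  have hrinit : ((PySem.List.pyRange 0 ((grid.getD 0 []).length : Int) 1).map
        (fun _ => false))
      = List.replicate (nOf grid) false := by
    rw [List.map_const', PySem.List.length_pyRange_one,
      show (((grid.getD 0 []).length : Int) - 0).toNat = nOf grid from by unfold nOf; omega]
  have hR0 : ∀ p0, List.replicate (nOf grid) false
      = (List.range (nOf grid)).map (fun q => if nOf grid - 0 ≤ q then g2 grid p0 q else false) := by
    intro p0
    apply List.ext_getElem
    · simp
    · intro t h1 h2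
      simp only [List.getElem_replicate, List.getElem_map, List.getElem_range]
      rw [if_neg (by simp at h1; omega)]
  have aux : ∀ r, r ≤ mOf grid →
      (((List.range r).map (fun k : ℕ => (grid.length : Int) - 1 - (k:Int))).foldl (fun g i =>
        ((((List.range (nOf grid)).map (fun k : ℕ => ((grid.getD 0 []).length : Int) - 1 - (k:Int))).foldl (fun row j =>
          PySem.List.pySetD row j (
            if i = (grid.length : Int)-1 ∧ j = ((grid.getD 0 []).length : Int)-1 then true
            else
              decide (pvG2 grid i j ≠ 0) &&
                ((if i < (grid.length : Int)-1 then pvG2B g 0 j else false) ||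
                 (if j < ((grid.getD 0 []).length : Int)-1 then PySem.List.pyGetD row (j+1) false else false))))
          ((PySem.List.pyRange 0 ((grid.getD 0 []).length : Int) 1).map (fun _ => false)))) :: g) [])
      = EG grid r := by
    intro r
    induction r with
    | zero => intro _; rfl
    | succ r ih =>
      intro hr
      rw [List.range_succ, List.map_append, List.foldl_append]
      simp only [List.map_cons, List.map_nil, List.foldl_cons, List.foldl_nil]
      rw [ih (by omega)]
      have hinner : ∀ c, c ≤ nOf grid →
          (((List.range c).map (fun k : ℕ => ((grid.getD 0 []).length : Int) - 1 - (k:Int))).foldl (fun row j =>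
            PySem.List.pySetD row j (
              if (grid.length : Int) - 1 - (r:Int) = (grid.length : Int)-1 ∧ j = ((grid.getD 0 []).length : Int)-1 then true
              else
                decide (pvG2 grid ((grid.length : Int) - 1 - (r:Int)) j ≠ 0) &&
                  ((if (grid.length : Int) - 1 - (r:Int) < (grid.length : Int)-1 then
                      pvG2B (EG grid r) 0 j else false) ||
                   (if j < ((grid.getD 0 []).length : Int)-1 then PySem.List.pyGetD row (j+1) false else false))))
            ((PySem.List.pyRange 0 ((grid.getD 0 []).length : Int) 1).map (fun _ => false)))
          = (List.range (nOf grid)).map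
              (fun q => if nOf grid - c ≤ q then g2 grid (mOf grid - 1 - r) q else false) := by
        intro c
        induction c with
        | zero =>
          intro _
          rw [hrinit, hR0 (mOf grid - 1 - r)]
          rfl
        | succ c ihc =>
          intro hc
          rw [List.range_succ, List.map_append, List.foldl_append]
          simp only [List.map_cons, List.map_nil, List.foldl_cons, List.foldl_nil]
          rw [ihc (by omega)]
          have hm' : mOf grid = grid.length := rfl
          have hn' : nOf grid = (grid.getD 0 []).length := rfl
          have ej : ((grid.getD 0 []).length : Int) - 1 - (c:Int)
              = ((nOf grid - 1 - c : ℕ) : Int) := by rw [← hn']; omega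
          have hq0 : nOf grid - 1 - c < nOf grid := by omega
          have hp0 : mOf grid - 1 - r < mOf grid := by omega
          have hval : (if (grid.length : Int) - 1 - (r:Int) = (grid.length : Int)-1 ∧
                ((grid.getD 0 []).length : Int) - 1 - (c:Int) = ((grid.getD 0 []).length : Int)-1 then true
              else
                decide (pvG2 grid ((grid.length : Int) - 1 - (r:Int)) (((grid.getD 0 []).length : Int) - 1 - (c:Int)) ≠ 0) &&
                  ((if (grid.length : Int) - 1 - (r:Int) < (grid.length : Int)-1 then
                      pvG2B (EG grid r) 0 (((grid.getD 0 []).length : Int) - 1 - (c:Int)) else false) ||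
                   (if ((grid.getD 0 []).length : Int) - 1 - (c:Int) < ((grid.getD 0 []).length : Int)-1 then
                      PySem.List.pyGetD ((List.range (nOf grid)).map
                        (fun q => if nOf grid - c ≤ q then g2 grid (mOf grid - 1 - r) q else false))
                        ((((grid.getD 0 []).length : Int) - 1 - (c:Int))+1) false else false)))
              = g2 grid (mOf grid - 1 - r) (nOf grid - 1 - c) := by
            by_cases hend : r = 0 ∧ c = 0
            · rw [if_pos (by rw [← hm', ← hn']; omega)]
              rw [show mOf grid - 1 - r = mOf grid - 1 from by omega,
                show nOf grid - 1 - c = nOf grid - 1 from by omega,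
                g2_end grid (by omega) (by omega)]
            · rw [if_neg (by rw [← hm', ← hn']; omega)]
              have hgb : decide (pvG2 grid ((grid.length : Int) - 1 - (r:Int))
                    (((grid.getD 0 []).length : Int) - 1 - (c:Int)) ≠ 0)
                  = gB grid (mOf grid - 1 - r) (nOf grid - 1 - c) := by
                rw [show (grid.length : Int) - 1 - (r:Int) = ((mOf grid - 1 - r : ℕ) : Int)
                    from by rw [← hm']; omega, ej, pvG2_cast]
                exact gB_decide grid _ _ hp0 hq0
              have hdown : (if (grid.length : Int) - 1 - (r:Int) < (grid.length : Int)-1 then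
                    pvG2B (EG grid r) 0 (((grid.getD 0 []).length : Int) - 1 - (c:Int)) else false)
                  = g2 grid (mOf grid - 1 - r + 1) (nOf grid - 1 - c) := by
                rcases Nat.eq_zero_or_pos r with hr0 | hr0
                · rw [if_neg (by rw [← hm']; omega),
                    g2_oob grid _ _ (by omega)]
                · rw [if_pos (by rw [← hm']; omega), ej]
                  simp only [pvG2B, PySem.List.pyGetD_zero, PySem.List.pyGetD_natCast]
                  unfold EG
                  rw [getD_map_range' _ r 0 [] (by omega),
                    getD_map_range' _ (nOf grid) (nOf grid - 1 - c) false (by omega),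
                    show mOf grid - r + 0 = mOf grid - 1 - r + 1 from by omega]
              have hright : (if ((grid.getD 0 []).length : Int) - 1 - (c:Int) < ((grid.getD 0 []).length : Int)-1 then
                    PySem.List.pyGetD ((List.range (nOf grid)).map
                      (fun q => if nOf grid - c ≤ q then g2 grid (mOf grid - 1 - r) q else false))
                      ((((grid.getD 0 []).length : Int) - 1 - (c:Int))+1) false else false)
                  = g2 grid (mOf grid - 1 - r) (nOf grid - 1 - c + 1) := by
                rcases Nat.eq_zero_or_pos c with hc0 | hc0
                · rw [if_neg (by rw [← hn']; omega),
                    g2_oob grid _ _ (by omega)]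
                · rw [if_pos (by rw [← hn']; omega),
                    show (((grid.getD 0 []).length : Int) - 1 - (c:Int))+1
                      = ((nOf grid - 1 - c + 1 : ℕ) : Int) from by rw [← hn']; omega,
                    PySem.List.pyGetD_natCast,
                    getD_map_range' _ (nOf grid) (nOf grid - 1 - c + 1) false (by omega),
                    if_pos (by omega)]
              rw [hgb, hdown, hright,
                g2_expand grid _ _ hp0 hq0 (by omega)]
          rw [hval, ej, PySem.List.pySetD_natCast,
            set_map_range _ (nOf grid) (nOf grid - 1 - c) _ hq0]
          apply List.map_congr_left
          intro q hq
          have hqn : q < nOf grid := List.mem_range.mp hq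
          by_cases hqq : q = nOf grid - 1 - c
          · rw [if_pos hqq, if_pos (by omega), hqq]
          · rw [if_neg hqq]
            by_cases h2 : nOf grid - (c+1) ≤ q
            · rw [if_pos h2, if_pos (by omega)]
            · rw [if_neg h2, if_neg (by omega)]
      rw [hinner (nOf grid) le_rfl]
      unfold EG
      rw [List.range_succ_eq_map, List.map_cons, List.map_map]
      congr 1
      · rw [show mOf grid - (r+1) + 0 = mOf grid - 1 - r from by omega]
        apply List.map_congr_left
        intro q hq
        rw [if_pos (by omega)]
      · apply List.map_congr_left
        intro t ht
        have : mOf grid - (r+1) + (t+1) = mOf grid - r + t := by omega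
        simp only [Function.comp_apply, this]
  exact aux (mOf grid) le_rfl

theorem pvG2_neg_one (t : List (List Int)) (M N : ℕ) (h1 : t.length = M+1)
    (h2 : ∀ row ∈ t, row.length = N+1) :
    pvG2 t (-1) (-1) = (t.getD M []).getD N 0 := by
  have hne : t ≠ [] := by intro h; rw [h] at h1; simp at h1
  unfold pvG2
  rw [PySem.List.pyGetD_neg_one t [] hne, List.getLast_eq_getElem]
  have hlt : t.length - 1 < t.length := by omega
  have hrow_mem : t[t.length - 1]'hlt ∈ t := List.getElem_mem hlt
  have hrl : (t[t.length - 1]'hlt).length = N+1 := h2 _ hrow_mem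
  have hne2 : t[t.length - 1]'hlt ≠ [] := by
    intro hnil; rw [hnil] at hrl; simp at hrl
  rw [PySem.List.pyGetD_neg_one _ 0 hne2, List.getLast_eq_getElem]
  have e1 : t.getD M [] = t[t.length - 1]'hlt := by
    rw [List.getD_eq_getElem t [] (show M < t.length by omega)]
    congr 1
    omega
  rw [e1, List.getD_eq_getElem _ 0 (show N < (t[t.length-1]'hlt).length by omega)]
  congr 1
  omega

theorem portA_eq (grid : List (List Int)) (hm : 1 ≤ mOf grid) (hn : 1 ≤ nOf grid)
    (hrows : ∀ r ∈ grid, nOf grid ≤ r.length) :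
    (isPossibleToCutPath grid = true
      ↔ (∃ i j, i < mOf grid ∧ j < nOf grid ∧ ¬(i = 0 ∧ j = 0) ∧
          ¬(i = mOf grid - 1 ∧ j = nOf grid - 1) ∧
          aM grid i j * b2 grid i j = tgt grid)) := by
  obtain ⟨h11, h12, hread1⟩ := dp1_bridge grid hm hn hrows
  obtain ⟨h21, h22, hread2⟩ := dp2_bridge grid hm hn hrows
  unfold isPossibleToCutPath
  simp only [PySem.List.pyGetD_zero]
  rw [List.any_eq_true]
  have hm' : mOf grid = grid.length := rfl
  have hn' : nOf grid = (grid.getD 0 []).length := rfl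
  constructor
  · rintro ⟨i, hi, hinner⟩
    rw [PySem.List.mem_pyRange_one] at hi
    obtain ⟨iN, rfl⟩ : ∃ iN : ℕ, i = (iN : Int) := ⟨i.toNat, by omega⟩
    have hiN : iN < mOf grid := by rw [hm']; omega
    rw [List.any_eq_true] at hinner
    obtain ⟨j, hj, hcond⟩ := hinner
    rw [PySem.List.mem_pyRange_one] at hj
    obtain ⟨jN, rfl⟩ : ∃ jN : ℕ, j = (jN : Int) := ⟨j.toNat, by omega⟩
    have hjN : jN < nOf grid := by rw [hn']; omega
    simp only [Bool.and_eq_true, Bool.or_eq_true, decide_eq_true_eq] at hcond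
    obtain ⟨⟨hc1, hc2⟩, heq⟩ := hcond
    rw [show ((iN:Int)+1) = ((iN+1 : ℕ) : Int) from by push_cast; ring,
      show ((jN:Int)+1) = ((jN+1 : ℕ) : Int) from by push_cast; ring,
      pvG2_cast, pvG2_cast,
      pvG2_neg_one _ (mOf grid) (nOf grid) h11 h12,
      hread1 (iN+1) (jN+1) (by omega) (by omega),
      hread1 (mOf grid) (nOf grid) le_rfl le_rfl,
      hread2 iN jN (by omega) (by omega),
      F1_eval_proc grid (mOf grid) 0 (iN+1) (jN+1) (by omega) (by omega) (by omega),
      F1_eval_proc grid (mOf grid) 0 (mOf grid) (nOf grid) (by omega) (by omega) (by omega),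
      F2_eval_proc grid (mOf grid) 0 iN jN (by omega) (by omega)] at heq
    simp only [Nat.add_sub_cancel] at heq
    refine ⟨iN, jN, hiN, hjN, by omega, by omega, ?_⟩
    unfold tgt
    exact_mod_cast heq
  · rintro ⟨iN, jN, hiN, hjN, h0, hend, heq⟩
    refine ⟨(iN:Int), by rw [PySem.List.mem_pyRange_one]; omega, ?_⟩
    rw [List.any_eq_true]
    refine ⟨(jN:Int), by rw [PySem.List.mem_pyRange_one]; omega, ?_⟩
    simp only [Bool.and_eq_true, Bool.or_eq_true, decide_eq_true_eq]
    refine ⟨⟨by omega, by omega⟩, ?_⟩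
    rw [show ((iN:Int)+1) = ((iN+1 : ℕ) : Int) from by push_cast; ring,
      show ((jN:Int)+1) = ((jN+1 : ℕ) : Int) from by push_cast; ring,
      pvG2_cast, pvG2_cast,
      pvG2_neg_one _ (mOf grid) (nOf grid) h11 h12,
      hread1 (iN+1) (jN+1) (by omega) (by omega),
      hread1 (mOf grid) (nOf grid) le_rfl le_rfl,
      hread2 iN jN (by omega) (by omega),
      F1_eval_proc grid (mOf grid) 0 (iN+1) (jN+1) (by omega) (by omega) (by omega),
      F1_eval_proc grid (mOf grid) 0 (mOf grid) (nOf grid) (by omega) (by omega) (by omega),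
      F2_eval_proc grid (mOf grid) 0 iN jN (by omega) (by omega)]
    simp only [Nat.add_sub_cancel]
    unfold tgt at heq
    exact_mod_cast heq

theorem card_shift (L lo : ℕ) (p : ℕ → Bool) :
    ((Finset.range L).filter (fun t => p (lo + t) = true)).card
      = ((Finset.Ico lo (lo + L)).filter (fun i => p i = true)).card := by
  apply Finset.card_bij (fun t _ => lo + t)
  · intro a ha
    simp only [Finset.mem_filter, Finset.mem_range, Finset.mem_Ico] at *
    exact ⟨⟨by omega, by omega⟩, ha.2⟩
  · intro a1 h1 a2 h2 h
    omega
  · intro b hb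
    simp only [Finset.mem_filter, Finset.mem_Ico, Finset.mem_range] at hb ⊢
    refine ⟨b - lo, ⟨by omega, ?_⟩, by omega⟩
    rw [show lo + (b - lo) = b from by omega]
    exact hb.2

theorem portB_eq (grid : List (List Int)) (hm : 1 ≤ mOf grid) (hn : 1 ≤ nOf grid)
    (hrows : ∀ r ∈ grid, nOf grid ≤ r.length) :
    (isPossibleToCutPath_alt grid = true
      ↔ (fM grid (mOf grid - 1) (nOf grid - 1) = false ∨
          ∃ K, 1 ≤ K ∧ K < mOf grid + nOf grid - 2 ∧ cntF grid K = 1)) := by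
  have hm' : mOf grid = grid.length := rfl
  have hn' : nOf grid = (grid.getD 0 []).length := rfl
  unfold isPossibleToCutPath_alt
  simp only [PySem.List.pyGetD_zero]
  rw [f_bridge grid hm hn hrows, g_bridge grid hm hn hrows]
  have hconn : pvG2B (EF grid (mOf grid)) ((grid.length : Int) - 1)
      (((grid.getD 0 []).length : Int) - 1) = fM grid (mOf grid - 1) (nOf grid - 1) := by
    rw [show ((grid.length : Int) - 1) = ((mOf grid - 1 : ℕ) : Int) from by rw [hm']; omega,
      show (((grid.getD 0 []).length : Int) - 1) = ((nOf grid - 1 : ℕ) : Int) from by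
        rw [hn']; omega,
      pvG2B_cast]
    unfold EF
    rw [getD_map_range' _ (mOf grid) (mOf grid - 1) [] (by omega),
      getD_map_range' _ (nOf grid) (nOf grid - 1) false (by omega)]
  rw [hconn]
  cases ht : fM grid (mOf grid - 1) (nOf grid - 1) with
  | false =>
    simp only [Bool.not_false, if_true]
    constructor
    · intro _; exact Or.inl trivial
    · intro _; trivial
  | true =>
    simp only [Bool.not_true, Bool.false_eq_true, if_false]
    have hcount : ∀ K : ℕ, 1 ≤ K → K ≤ mOf grid + nOf grid - 3 →
        ((PySem.List.pyRange (max 0 ((K:Int) - ((grid.getD 0 []).length : Int) + 1))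
            (min (grid.length : Int) ((K:Int)+1)) 1).foldl
          (fun (c : Int) i =>
            if pvG2B (EF grid (mOf grid)) i ((K:Int)-i) &&
                pvG2B (EG grid (mOf grid)) i ((K:Int)-i) then c + 1 else c) 0)
        = (cntF grid K : Int) := by
      intro K hK1 hK2
      have hlo : max 0 ((K:Int) - ((grid.getD 0 []).length : Int) + 1)
          = ((K + 1 - nOf grid : ℕ) : Int) := by rw [hn'] at *; omega
      have hhi : min (grid.length : Int) ((K:Int)+1) = ((min (mOf grid) (K+1) : ℕ) : Int) := by
        rw [hm'] at *; omega
      rw [hlo, hhi, foldl_count]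
      have hL : ((((min (mOf grid) (K+1) : ℕ) : Int)) - ((K + 1 - nOf grid : ℕ) : Int)).toNat
          = sizeF grid K := by unfold sizeF; omega
      rw [PySem.List.pyRange_one, List.countP_map, hL]
      have hcong : ∀ t ∈ List.range (sizeF grid K),
          ((fun i => pvG2B (EF grid (mOf grid)) i ((K:Int)-i) &&
              pvG2B (EG grid (mOf grid)) i ((K:Int)-i)) ∘
            (fun k : ℕ => ((K + 1 - nOf grid : ℕ) : Int) + (k:Int))) t = true
          ↔ (fun t => qK grid K (K + 1 - nOf grid + t)) t = true := by
        intro t htm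
        have htL : t < sizeF grid K := List.mem_range.mp htm
        have hb1 : K + 1 - nOf grid + t < mOf grid := by unfold sizeF at htL; omega
        have hb2 : K - (K + 1 - nOf grid + t) < nOf grid := by unfold sizeF at htL; omega
        simp only [Function.comp_apply]
        rw [show ((K + 1 - nOf grid : ℕ) : Int) + (t:Int) = ((K + 1 - nOf grid + t : ℕ) : Int)
            from by push_cast; ring,
          show (K:Int) - ((K + 1 - nOf grid + t : ℕ) : Int)
              = ((K - (K + 1 - nOf grid + t) : ℕ) : Int) from by omega,
          pvG2B_cast, pvG2B_cast]
        unfold EF EG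
        rw [getD_map_range' _ (mOf grid) (K + 1 - nOf grid + t) [] hb1,
          getD_map_range' _ (nOf grid) (K - (K + 1 - nOf grid + t)) false hb2,
          getD_map_range' _ (mOf grid) (K + 1 - nOf grid + t) [] hb1,
          getD_map_range' _ (nOf grid) (K - (K + 1 - nOf grid + t)) false hb2,
          show mOf grid - mOf grid + (K + 1 - nOf grid + t) = K + 1 - nOf grid + t from by omega]
        unfold qK
        exact Iff.rfl
      rw [List.countP_congr hcong, countP_range_card,
        card_shift (sizeF grid K) (K + 1 - nOf grid) (fun i => qK grid K i),
        show K + 1 - nOf grid + sizeF grid K = min (mOf grid) (K+1) from by unfold sizeF; omega,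
        ← cntF_window grid hm hn K]
      omega
    rw [List.any_eq_true]
    constructor
    · rintro ⟨k, hk, hcond⟩
      rw [PySem.List.mem_pyRange_one] at hk
      obtain ⟨K, rfl⟩ : ∃ K : ℕ, k = (K : Int) := ⟨k.toNat, by omega⟩
      have hK1 : 1 ≤ K := by omega
      have hK2 : K < mOf grid + nOf grid - 2 := by rw [hm', hn'] at *; omega
      rw [hcount K hK1 (by omega)] at hcond
      simp only [beq_iff_eq] at hcond
      exact Or.inr ⟨K, hK1, hK2, by omega⟩
    · rintro (hcon | ⟨K, hK1, hK2, hcond⟩)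
      · simp at hcon
      · refine ⟨(K : Int), by rw [PySem.List.mem_pyRange_one]; rw [hm', hn'] at hK2; omega, ?_⟩
        rw [hcount K hK1 (by omega)]
        simp only [beq_iff_eq]
        omega

-- ===== VERDICT (by name: the statements are the Claim_ definitions above) =====
theorem isPossibleToCutPath_spec : Claim_unchanged_isPossibleToCutPath := by
  intro grid _ hpre hnD
  obtain ⟨h1, h2, h3⟩ := hpre
  have hm : 1 ≤ mOf grid := by
    cases grid with
    | nil => exact absurd rfl h1
    | cons r t => simp [mOf]
  have hn : 1 ≤ nOf grid := by
    unfold nOf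
    cases h : grid.getD 0 [] with
    | nil => exact absurd h h2
    | cons x t => simp
  exact Bool.eq_iff_iff.mpr
    ((portA_eq grid hm hn h3).trans
      ((mathEquiv grid hm hn hnD).trans (portB_eq grid hm hn h3).symm))

theorem isPossibleToCutPath_changed : Claim_changed_isPossibleToCutPath := by
  unfold Claim_changed_isPossibleToCutPath; decide

theorem isPossibleToCutPath_tight : Claim_exact_isPossibleToCutPath := by
  intro grid _ hpre hD
  obtain ⟨h1, h2, h3⟩ := hpre
  have hm : 1 ≤ mOf grid := by
    cases grid with
    | nil => exact absurd rfl h1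
    | cons r t => simp [mOf]
  have hn : 1 ≤ nOf grid := by
    unfold nOf
    cases h : grid.getD 0 [] with
    | nil => exact absurd h h2
    | cons x t => simp
  obtain ⟨hsz, hend0, hall⟩ := hD
  have hm' : mOf grid = grid.length := rfl
  have hn' : nOf grid = (grid.getD 0 []).length := rfl
  have hall' : ∀ i, i < mOf grid → ∀ j, j < nOf grid → ¬(i = 0 ∧ j = 0) →
      ¬(i = mOf grid - 1 ∧ j = nOf grid - 1) → (grid.getD i []).getD j 0 ≠ 0 := by
    intro i hi j hj h0 hne
    exact hall i (by rw [← hm']; exact hi) j (by rw [← hn']; exact hj) h0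
      (by rw [← hm', ← hn']; exact hne)
  have hdis : fM grid (mOf grid - 1) (nOf grid - 1) = false := by
    have hne : ¬(mOf grid - 1 = 0 ∧ nOf grid - 1 = 0) := by
      rintro ⟨e1, e2⟩
      have ha := hm; rw [hm'] at ha
      have hb := hn; rw [hn'] at hb
      rw [hm'] at e1; rw [hn'] at e2
      omega
    rw [fM_expand grid _ _ hne]
    have hgb : gB grid (mOf grid - 1) (nOf grid - 1) = false := by
      have hvz : (grid.getD (mOf grid - 1) []).getD (nOf grid - 1) 0 = 0 := by
        rw [hm', hn']; exact hend0
      unfold gB; rw [hvz]; simp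
    rw [hgb, Bool.false_and]
  have hB : isPossibleToCutPath_alt grid = true :=
    (portB_eq grid hm hn h3).mpr (Or.inl hdis)
  have hA : isPossibleToCutPath grid = false := by
    rw [← Bool.not_eq_true, portA_eq grid hm hn h3]
    rintro ⟨i, j, hi, hj, h0, hne, hprod⟩
    have hT : tgt grid = 0 := by
      have := (aM_pos_iff grid (mOf grid - 1) (nOf grid - 1)).not.mpr (by rw [hdis]; simp)
      unfold tgt
      omega
    have hf : fM grid i j = true := allF grid hall' i j hi hj hne
    have hg : g2 grid i j = true := allG grid hm hn hall' i j hi hj h0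
    have hp1 : 0 < aM grid i j := (aM_pos_iff grid i j).mpr hf
    have hp2 : 0 < b2 grid i j := (b2_pos_iff grid i j).mpr hg
    have := Nat.mul_pos hp1 hp2
    omega
  rw [hA, hB]
  exact Bool.false_ne_true
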